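-- pv_equiv track=rewrite | github.com/Daniel-Vennemeyer/questbench | Planning/backtrace_utils.py | check_self_consistency
-- ===== SOURCE A (Python) =====
-- import itertools as it
--
-- def check_self_consistency(domain, facts, contradicting_fact_pairs):
--   """Checks if a set of facts is self-consistent (physically plausible) in domain.
--
--   Args:
--     domain: domain of the task
--     facts: set of facts to check
--     contradicting_fact_pairs: set of pairs of facts that contradict each other
--
--   Returns:
--     True if facts are self-consistent, False otherwise.
--   """
--   # get all pairs of facts
--   fact_pairs = it.product(list(facts), list(facts))
--   for fact_pair in fact_pairs:
--     if fact_pair in contradicting_fact_pairs: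
--       return False
--
--   if domain == "blocks":
--     # check cycles (on X Y) (on Y Z) --> not (on X Z)
--     stacks = []
--     for fact in facts:
--       if "(on " in fact:
--         top = fact.split(" ")[1]
--         bottom = fact.split(" ")[2].strip(")")
--         bottom_stack = -1
--         top_stack = -1
--
--         for s, stack in enumerate(stacks):
--           if bottom in stack:
--             bottom_stack = s
--           if top in stack:
--             top_stack = s
--         if bottom_stack == -1 and top_stack == -1:
--           # no stack contains either element
--           stacks.append([bottom, top])
--         elif bottom_stack == -1:
--           # top exists in stack, add prepend bottom to that stack
--           if stacks[top_stack][0] != top: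
--             # current bottom of stack is top item
--             return False
--           stacks[top_stack].insert(0, bottom)
--         elif top_stack == -1:
--           # bottom exists in stack, append top to that stack
--           if stacks[bottom_stack][-1] != bottom:
--             # current top of stack is bottom item
--             return False
--           stacks[bottom_stack].append(top)
--         else:
--           if bottom_stack == top_stack:
--             # stacking same stack on top of itself
--             return False
--           if stacks[bottom_stack][-1] != bottom:
--             # current top of stack is bottom item
--             return False
--           if stacks[top_stack][0] != top:
--             # current bottom of stack is top item
--             return False
--           # merge stacks
--           stacks[bottom_stack].extend(stacks[top_stack])
--           # remove top stack
--           stacks.pop(top_stack)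
--     for stack in stacks:
--       # find cycles
--       if len(set(stack)) != len(stack):
--         return False
--     count_held = 0
--     for fact in facts:
--       if "(holding" in fact:
--         count_held += 1
--       if count_held > 1:
--         return False
--
--   return True
-- ===== SOURCE B (Python) =====
-- def check_self_consistency(domain, facts, contradicting_fact_pairs):
--   """Checks if a set of facts is self-consistent (physically plausible) in domain.
--
--   Scans the contradicting pairs once against a set of the facts, and replaces
--   the incremental stack-merging of the original by an endpoint-availability +
--   component-label (union-find style) check over the "(on ...)" edges.
--   """
--   fact_set = set(facts)
--   for pair in contradicting_fact_pairs:
--     if pair[0] in fact_set and pair[1] in fact_set: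
--       return False
--
--   if domain == "blocks":
--     has_above = set()   # blocks that already carry something
--     has_below = set()   # blocks that already rest on something
--     comp = {}           # block -> connected-component label
--     fresh = 0
--     for fact in facts:
--       if "(on " in fact:
--         parts = fact.split(" ")
--         top = parts[1]
--         bottom = parts[2].strip(")")
--         if bottom in has_above or top in has_below:
--           # some block would carry, or rest on, two different things
--           return False
--         if bottom == top:
--           # a block on itself
--           return False
--         cb = comp.get(bottom)
--         ct = comp.get(top)
--         if cb is not None and cb == ct:
--           # both ends already in the same chain: closing a cycle
--           return False
--         has_above.add(bottom)
--         has_below.add(top)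
--         if cb is None and ct is None:
--           comp[bottom] = fresh
--           comp[top] = fresh
--           fresh += 1
--         elif cb is None:
--           comp[bottom] = ct
--         elif ct is None:
--           comp[top] = cb
--         else:
--           for k in comp:
--             if comp[k] == ct:
--               comp[k] = cb
--     if sum(1 for fact in facts if "(holding" in fact) > 1:
--       return False
--
--   return True
-- ===== Notes on version B (the rewrite author's own statement) =====
-- stated objective: faster
-- what changed: A's contradiction check iterates over all |facts|^2 ordered pairs and scans the pair list for each, and its blocks check repeatedly scans a list of stacks and merges them; B checks each contradicting pair once against a set of the facts, and replaces the stack-merging by a one-pass endpoint-availability (has_above/has_below sets) plus component-label (union-find style) check over the parsed '(on top bottom)' edges, with a final holding count.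
-- outside the precondition, e.g. on check_self_consistency('blocks', {'(on ', 'x'}, {('(on ', 'x')}): A returns False, B returns False
import Mathlib
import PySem

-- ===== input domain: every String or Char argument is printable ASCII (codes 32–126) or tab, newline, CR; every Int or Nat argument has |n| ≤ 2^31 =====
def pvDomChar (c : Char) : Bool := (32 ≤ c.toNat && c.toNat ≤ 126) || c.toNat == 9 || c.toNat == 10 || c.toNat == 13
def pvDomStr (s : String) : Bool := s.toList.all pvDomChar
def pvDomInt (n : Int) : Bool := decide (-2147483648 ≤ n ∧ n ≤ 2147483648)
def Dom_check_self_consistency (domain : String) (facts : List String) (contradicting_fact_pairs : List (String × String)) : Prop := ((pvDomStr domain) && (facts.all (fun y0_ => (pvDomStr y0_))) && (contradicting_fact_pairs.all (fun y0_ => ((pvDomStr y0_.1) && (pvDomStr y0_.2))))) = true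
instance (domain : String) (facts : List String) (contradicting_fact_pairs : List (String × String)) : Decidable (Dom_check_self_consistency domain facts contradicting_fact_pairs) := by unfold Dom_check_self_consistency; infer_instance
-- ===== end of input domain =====

-- B replaces A's O(|facts|^2) pair scan and incremental stack-merging by a one-pass
-- endpoint-availability + component-label check over the "(on ...)" edges (equal return values proved below).

-- ===== PORT A =====

-- fact.split(" ") — the separator " " is nonempty, so Python's split never raises and split? is always some
def csc_parts (fact : String) : List String := (PySem.Str.split? fact " ").getD []

-- the enumerate-scan 'for s, stack in enumerate(stacks): if bottom in stack: … if top in stack: …'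
def csc_findStacks (sks : List (List String)) (bottom top : String) : Int × Int :=
  (PySem.List.enumerate sks 0).foldl
    (fun (p : Int × Int) (e : Int × List String) =>
      let p1 := if e.2.contains bottom then (e.1, p.2) else p
      if e.2.contains top then (p1.1, e.1) else p1)
    (-1, -1)

-- the 'for fact in facts:' loop building the stacks; 'none' = an early 'return False'
def csc_sksLoop : List String → List (List String) → Option (List (List String))
  | [], sks => some sks
  | fact :: rest, sks =>
    if PySem.Str.isIn "(on " fact then
      let top := PySem.List.pyGetD (csc_parts fact) 1 ""
      let bottom := PySem.Str.stripChars (PySem.List.pyGetD (csc_parts fact) 2 "") ")"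
      let bs := (csc_findStacks sks bottom top).1
      let ts := (csc_findStacks sks bottom top).2
      if bs == -1 && ts == -1 then
        csc_sksLoop rest (sks ++ [[bottom, top]])
      else if bs == -1 then
        if PySem.List.pyGetD (PySem.List.pyGetD sks ts []) 0 "" != top then none
        else csc_sksLoop rest (PySem.List.pySetD sks ts (PySem.List.insert (PySem.List.pyGetD sks ts []) 0 bottom))
      else if ts == -1 then
        if PySem.List.pyGetD (PySem.List.pyGetD sks bs []) (-1) "" != bottom then none
        else csc_sksLoop rest (PySem.List.pySetD sks bs (PySem.List.pyGetD sks bs [] ++ [top]))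
      else
        if bs == ts then none
        else if PySem.List.pyGetD (PySem.List.pyGetD sks bs []) (-1) "" != bottom then none
        else if PySem.List.pyGetD (PySem.List.pyGetD sks ts []) 0 "" != top then none
        else
          -- stacks[bottom_stack].extend(stacks[top_stack]); stacks.pop(top_stack)
          -- (ts ≥ 0 here — it was found by the scan — so pop(ts) is eraseIdx ts)
          csc_sksLoop rest
            ((PySem.List.pySetD sks bs
                (PySem.List.pyGetD sks bs [] ++ PySem.List.pyGetD sks ts [])).eraseIdx ts.toNat)
    else csc_sksLoop rest sks

-- 'for stack in stacks: if len(set(stack)) != len(stack): return False'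
def csc_dupCheck (sks : List (List String)) : Bool :=
  sks.all (fun st => PySem.Set.len (PySem.Set.ofList st) == (st.length : Int))

-- 'count_held = 0; for fact in facts: …'
def csc_holdingLoop : List String → Int → Bool
  | [], _ => true
  | fact :: rest, cnt =>
    let cnt' := if PySem.Str.isIn "(holding" fact then cnt + 1 else cnt
    if cnt' > 1 then false else csc_holdingLoop rest cnt'

def check_self_consistency (domain : String) (facts : List String) (contradicting_fact_pairs : List (String × String)) : Bool :=
  -- for fact_pair in it.product(facts, facts): if fact_pair in contradicting_fact_pairs: return False
  if facts.any (fun f1 => facts.any (fun f2 => contradicting_fact_pairs.contains (f1, f2))) then false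
  else if domain == "blocks" then
    match csc_sksLoop facts [] with
    | none => false
    | some sks =>
      if csc_dupCheck sks then csc_holdingLoop facts 0 else false
  else true

-- ===== PORT B =====

-- fact.split(" ") on B's side (separator " " is nonempty, split? is always some)
def cscAlt_parts (fact : String) : List String := (PySem.Str.split? fact " ").getD []

-- B's edge loop: endpoint-availability sets + component labels (false = early 'return False')
def cscAlt_loop : List String → PySem.Set String → PySem.Set String → PySem.Dict String Int → Int → Bool
  | [], _, _, _, _ => true
  | fact :: rest, ha, hb, comp, fresh =>
    if PySem.Str.isIn "(on " fact then
      let parts := cscAlt_parts fact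
      let top := PySem.List.pyGetD parts 1 ""
      let bottom := PySem.Str.stripChars (PySem.List.pyGetD parts 2 "") ")"
      if PySem.Set.contains ha bottom || PySem.Set.contains hb top then false
      else if bottom == top then false
      else
        let cb := comp.get? bottom
        let ct := comp.get? top
        if cb.isSome && cb == ct then false
        else
          let ha' := PySem.Set.add ha bottom
          let hb' := PySem.Set.add hb top
          match cb, ct with
          | none, none => cscAlt_loop rest ha' hb' ((comp.insert bottom fresh).insert top fresh) (fresh + 1)
          | none, some c => cscAlt_loop rest ha' hb' (comp.insert bottom c) fresh
          | some c, none => cscAlt_loop rest ha' hb' (comp.insert top c) fresh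
          | some c, some c' =>
            -- 'for k in comp: if comp[k] == ct: comp[k] = cb' (value rewrite keeps insertion order)
            cscAlt_loop rest ha' hb' ⟨comp.items.map (fun p => if p.2 == c' then (p.1, c) else p)⟩ fresh
    else cscAlt_loop rest ha hb comp fresh

def check_self_consistency_alt (domain : String) (facts : List String) (contradicting_fact_pairs : List (String × String)) : Bool :=
  let fact_set := PySem.Set.ofList facts
  if contradicting_fact_pairs.any
      (fun p => PySem.Set.contains fact_set p.1 && PySem.Set.contains fact_set p.2) then false
  else if domain == "blocks" then
    if cscAlt_loop facts PySem.Set.empty PySem.Set.empty PySem.Dict.empty 0 then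
      -- sum(1 for fact in facts if "(holding" in fact) > 1
      if 1 < facts.countP (fun f => PySem.Str.isIn "(holding" f) then false else true
    else false
  else true

-- ===== PRECONDITION & SPEC =====
-- Pre_ excludes the inputs where domain is "blocks" and some fact contains "(on " but splits into
-- fewer than three space-separated tokens: there A raises IndexError at fact.split(" ")[2] (except
-- when the contradicting-pair scan returns False before parsing — then both programs return False).
def Pre_check_self_consistency (domain : String) (facts : List String) (contradicting_fact_pairs : List (String × String)) : Prop :=
  domain = "blocks" →
    ∀ fact ∈ facts, PySem.Str.isIn "(on " fact = true → 3 ≤ (csc_parts fact).length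
instance (domain : String) (facts : List String) (contradicting_fact_pairs : List (String × String)) : Decidable (Pre_check_self_consistency domain facts contradicting_fact_pairs) := by unfold Pre_check_self_consistency; infer_instance

def pvWitness_check_self_consistency : String × List String × (List (String × String)) :=
  ("blocks", ["(on b a)", "(holding c)"], [("(clear a)", "(on b a)")])

def Spec_check_self_consistency (domain : String) (facts : List String) (contradicting_fact_pairs : List (String × String)) (out : Bool) : Prop := out = check_self_consistency_alt domain facts contradicting_fact_pairs
instance (domain : String) (facts : List String) (contradicting_fact_pairs : List (String × String)) (out : Bool) : Decidable (Spec_check_self_consistency domain facts contradicting_fact_pairs out) := by unfold Spec_check_self_consistency; infer_instance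

-- ===== CLAIM (what is proved, stated in full; the proofs are below) =====
def Claim_equal_check_self_consistency : Prop := ∀ (domain : String) (facts : List String) (contradicting_fact_pairs : List (String × String)), Dom_check_self_consistency domain facts contradicting_fact_pairs → Pre_check_self_consistency domain facts contradicting_fact_pairs → Spec_check_self_consistency domain facts contradicting_fact_pairs (check_self_consistency domain facts contradicting_fact_pairs)

-- ===== LEMMAS AND PROOFS =====

-- A's result as computed from an intermediate stacks state (early False, or the final duplicate check)
def cscARes (rest : List String) (sks : List (List String)) : Bool :=
  match csc_sksLoop rest sks with
  | none => false
  | some s => csc_dupCheck s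

-- the simulation invariant tying A's stacks to B's (has_above, has_below, comp, fresh)
def cscInv (sks : List (List String)) (ha hb : PySem.Set String) (comp : PySem.Dict String Int) (fresh : Int) : Prop :=
  (∀ st ∈ sks, st ≠ [] ∧ st.Nodup) ∧
  (sks.Pairwise (fun s t => ∀ x, x ∈ s → x ∉ t)) ∧
  (∀ x, x ∈ ha ↔ ∃ st ∈ sks, x ∈ st.dropLast) ∧
  (∀ x, x ∈ hb ↔ ∃ st ∈ sks, x ∈ st.tail) ∧
  (∀ x, (comp.get? x).isSome ↔ ∃ st ∈ sks, x ∈ st) ∧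
  (∀ x y cx cy, comp.get? x = some cx → comp.get? y = some cy →
     (cx = cy ↔ ∃ st ∈ sks, x ∈ st ∧ y ∈ st)) ∧
  (∀ x c, comp.get? x = some c → c < fresh)

-- both contradiction scans answer: is there a contradicting pair with both components among the facts?
theorem csc_contra_eq (facts : List String) (pairs : List (String × String)) :
    (facts.any (fun f1 => facts.any (fun f2 => pairs.contains (f1, f2)))) =
    (pairs.any (fun p => PySem.Set.contains (PySem.Set.ofList facts) p.1 &&
                         PySem.Set.contains (PySem.Set.ofList facts) p.2)) := by
  rw [Bool.eq_iff_iff]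
  simp only [List.any_eq_true, Bool.and_eq_true, PySem.Set.contains_iff, PySem.Set.mem_ofList,
    List.contains_iff_mem]
  constructor
  · rintro ⟨a, h1, b, h2, hp⟩; exact ⟨(a, b), hp, h1, h2⟩
  · rintro ⟨⟨a, b⟩, hp, h1, h2⟩; exact ⟨a, h1, b, h2, hp⟩

-- Python's len(set(stack)) == len(stack) is exactly Nodup
theorem csc_dup_iff (st : List String) :
    (PySem.Set.len (PySem.Set.ofList st) == (st.length : Int)) = true ↔ st.Nodup := by
  simp only [PySem.Set.len, beq_iff_eq, Nat.cast_inj]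
  constructor
  · intro h
    have hsub : List.Subperm (PySem.Set.ofList st) st :=
      List.subperm_of_subset (PySem.Set.nodup_ofList st) (fun x hx => (PySem.Set.mem_ofList st x).mp hx)
    have := hsub.perm_of_length_le (le_of_eq h.symm)
    exact this.symm.nodup_iff.mpr (PySem.Set.nodup_ofList st)
  · intro h; rw [PySem.Set.ofList_eq_self_of_nodup st h]

theorem csc_holding_eq (l : List String) (c : Int) :
    c ≤ 1 →
    csc_holdingLoop l c =
      decide (c + (l.countP (fun f => PySem.Str.isIn "(holding" f) : Int) ≤ 1) := by
  induction l generalizing c with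
  | nil =>
    intro hc
    simp only [csc_holdingLoop, List.countP_nil, Nat.cast_zero, add_zero]
    exact (decide_eq_true (by omega)).symm
  | cons f rest ih =>
    intro hc
    by_cases hf : PySem.Str.isIn "(holding" f
    · simp only [csc_holdingLoop, hf, if_true, List.countP_cons]
      by_cases hgt : c + 1 > 1
      · rw [if_pos hgt, eq_comm, decide_eq_false_iff_not]
        have : (0 : Int) ≤ (rest.countP (fun f => PySem.Str.isIn "(holding" f) : Int) := by positivity
        push_cast
        omega
      · rw [if_neg hgt, ih (c + 1) (by omega)]
        congr 1
        rw [eq_iff_iff]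
        push_cast
        omega
    · simp only [csc_holdingLoop, hf, Bool.false_eq_true, if_false, List.countP_cons,
        decide_false, add_zero]
      rw [if_neg (by omega), ih c hc]

theorem csc_findStacks_eq (sks : List (List String)) (b t : String) :
    csc_findStacks sks b t =
      ((PySem.List.enumerate sks 0).foldl (fun a e => if e.2.contains b then e.1 else a) (-1),
       (PySem.List.enumerate sks 0).foldl (fun a e => if e.2.contains t then e.1 else a) (-1)) := by
  unfold csc_findStacks
  rw [← PySem.List.foldl_prod_mk]
  congr 1
  funext p e
  by_cases h1 : b ∈ e.2 <;> by_cases h2 : t ∈ e.2 <;> simp [h1, h2]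

theorem csc_fold_none (v : String) (sks : List (List String)) (s a : Int)
    (h : ∀ st ∈ sks, v ∉ st) :
    (PySem.List.enumerate sks s).foldl (fun a e => if e.2.contains v then e.1 else a) a = a := by
  induction sks generalizing s a with
  | nil => simp [PySem.List.enumerate]
  | cons st rest ih =>
    rw [PySem.List.enumerate_cons]
    simp only [List.foldl_cons]
    have : st.contains v = false := by
      simpa using h st List.mem_cons_self
    simp only [this, Bool.false_eq_true, if_false]
    exact ih (s + 1) a (fun st' h' => h st' (List.mem_cons_of_mem _ h'))

theorem csc_fold_found (v : String) (sks : List (List String)) (i : Nat)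
    (hi : i < sks.length) (hv : v ∈ sks[i])
    (huniq : ∀ j (hj : j < sks.length), v ∈ sks[j] → j = i) (s a : Int) :
    (PySem.List.enumerate sks s).foldl (fun a e => if e.2.contains v then e.1 else a) a
      = s + i := by
  induction sks generalizing i s a with
  | nil => simp at hi
  | cons st rest ih =>
    rw [PySem.List.enumerate_cons]
    simp only [List.foldl_cons]
    cases i with
    | zero =>
      simp only [List.getElem_cons_zero] at hv
      have hct : st.contains v = true := by simpa using hv
      simp only [hct, if_true]
      rw [csc_fold_none v rest (s+1) s]
      · simp
      · intro st' h'
        obtain ⟨j, hj, rfl⟩ := List.getElem_of_mem h'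
        intro hmem
        have := huniq (j+1) (by simpa using Nat.succ_lt_succ hj) (by simpa using hmem)
        omega
    | succ k =>
      have hct : st.contains v = false := by
        simp only [Bool.eq_false_iff, ne_eq, List.contains_iff_mem]
        intro hmem
        have := huniq 0 (by omega) (by simpa using hmem)
        omega
      simp only [hct, Bool.false_eq_true, if_false]
      have hk : k < rest.length := by simpa using hi
      rw [ih k hk (by simpa using hv) (fun j hj hm => by
        have := huniq (j+1) (by simpa using Nat.succ_lt_succ hj) (by simpa using hm)
        omega) (s+1) a]
      push_cast; ring

theorem csc_fold_cases (v : String) (sks : List (List String)) (s a : Int) :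
    (PySem.List.enumerate sks s).foldl (fun a e => if e.2.contains v then e.1 else a) a = a ∨
    ∃ k, ∃ _ : k < sks.length,
      (PySem.List.enumerate sks s).foldl (fun a e => if e.2.contains v then e.1 else a) a = s + k
        ∧ v ∈ sks[k] := by
  induction sks generalizing s a with
  | nil => left; simp [PySem.List.enumerate]
  | cons st rest ih =>
    rw [PySem.List.enumerate_cons]
    simp only [List.foldl_cons]
    by_cases hct : st.contains v
    · simp only [hct, if_true]
      rcases ih (s+1) s with h | ⟨k, hk, h, hm⟩
      · right; exact ⟨0, by simp, by simpa using h, by simpa using hct⟩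
      · right; exact ⟨k+1, by simpa using Nat.succ_lt_succ hk, by rw [h]; push_cast; ring_nf, by simpa using hm⟩
    · simp only [hct, Bool.false_eq_true, if_false]
      rcases ih (s+1) a with h | ⟨k, hk, h, hm⟩
      · left; exact h
      · right; exact ⟨k+1, by simpa using Nat.succ_lt_succ hk, by rw [h]; push_cast; ring_nf, by simpa using hm⟩

theorem csc_disj_idx {sks : List (List String)}
    (hD : sks.Pairwise (fun s t => ∀ x, x ∈ s → x ∉ t)) {i j : Nat}
    (hi : i < sks.length) (hj : j < sks.length) {x : String}
    (hx : x ∈ sks[i]) (hy : x ∈ sks[j]) : i = j := by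
  rcases lt_trichotomy i j with h | h | h
  · exact absurd hy ((List.pairwise_iff_getElem.mp hD i j hi hj h) x hx)
  · exact h
  · exact absurd hx ((List.pairwise_iff_getElem.mp hD j i hj hi h) x hy)

theorem csc_mem_dropLast_iff (st : List String) (hnd : st.Nodup) (hne : st ≠ []) {x : String}
    (hx : x ∈ st) : x ∈ st.dropLast ↔ x ≠ st.getLast hne := by
  rcases List.eq_nil_or_concat st with rfl | ⟨l, a, rfl⟩
  · exact absurd rfl hne
  · simp only [List.concat_eq_append] at hnd hx ⊢
    have hna : a ∉ l := by
      rw [List.nodup_append] at hnd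
      intro hm
      exact hnd.2.2 a hm a (List.mem_singleton_self a) rfl
    rw [List.dropLast_concat, List.getLast_append]
    simp only [List.mem_append, List.mem_singleton] at hx
    constructor
    · intro hm
      rintro rfl
      exact hna hm
    · intro hnx
      rcases hx with hm | rfl
      · exact hm
      · exact absurd rfl hnx

theorem csc_mem_tail_iff (st : List String) (hnd : st.Nodup) (hne : st ≠ []) {x : String}
    (hx : x ∈ st) : x ∈ st.tail ↔ x ≠ st.head hne := by
  cases st with
  | nil => simp at hne
  | cons h tl =>
    simp only [List.tail_cons, List.head_cons]
    rw [List.nodup_cons] at hnd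
    simp only [List.mem_cons] at hx
    constructor
    · intro hm; rintro rfl; exact hnd.1 hm
    · intro hnx
      rcases hx with rfl | hm
      · exact absurd rfl hnx
      · exact hm

-- has-a-duplicate-stack ("doomed": A's final duplicate check must fail)
def cscHasDup (sks : List (List String)) : Prop := ∃ i, ∃ _ : i < sks.length, ¬ sks[i].Nodup

-- one "(on " step of A's loop, with bottom/top abstracted
def cscStepA (b t : String) (sks : List (List String)) : Option (List (List String)) :=
  let bs := (csc_findStacks sks b t).1
  let ts := (csc_findStacks sks b t).2
  if bs == -1 && ts == -1 then some (sks ++ [[b, t]])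
  else if bs == -1 then
    if PySem.List.pyGetD (PySem.List.pyGetD sks ts []) 0 "" != t then none
    else some (PySem.List.pySetD sks ts (PySem.List.insert (PySem.List.pyGetD sks ts []) 0 b))
  else if ts == -1 then
    if PySem.List.pyGetD (PySem.List.pyGetD sks bs []) (-1) "" != b then none
    else some (PySem.List.pySetD sks bs (PySem.List.pyGetD sks bs [] ++ [t]))
  else
    if bs == ts then none
    else if PySem.List.pyGetD (PySem.List.pyGetD sks bs []) (-1) "" != b then none
    else if PySem.List.pyGetD (PySem.List.pyGetD sks ts []) 0 "" != t then none
    else some ((PySem.List.pySetD sks bs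
        (PySem.List.pyGetD sks bs [] ++ PySem.List.pyGetD sks ts [])).eraseIdx ts.toNat)

theorem csc_sksLoop_cons_on (fact : String) (rest : List String) (sks : List (List String))
    (hin : PySem.Str.isIn "(on " fact = true) :
    csc_sksLoop (fact :: rest) sks =
      match cscStepA (PySem.Str.stripChars (PySem.List.pyGetD (csc_parts fact) 2 "") ")")
                     (PySem.List.pyGetD (csc_parts fact) 1 "") sks with
      | none => none
      | some sks' => csc_sksLoop rest sks' := by
  simp only [csc_sksLoop, hin, if_true, cscStepA]
  split_ifs <;> rfl

theorem csc_sksLoop_cons_off (fact : String) (rest : List String) (sks : List (List String))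
    (hin : PySem.Str.isIn "(on " fact = false) :
    csc_sksLoop (fact :: rest) sks = csc_sksLoop rest sks := by
  simp only [csc_sksLoop, hin, Bool.false_eq_true, if_false]

theorem cscARes_cons_on (fact : String) (rest : List String) (sks : List (List String))
    (hin : PySem.Str.isIn "(on " fact = true) :
    cscARes (fact :: rest) sks =
      match cscStepA (PySem.Str.stripChars (PySem.List.pyGetD (csc_parts fact) 2 "") ")")
                     (PySem.List.pyGetD (csc_parts fact) 1 "") sks with
      | none => false
      | some sks' => cscARes rest sks' := by
  unfold cscARes
  rw [csc_sksLoop_cons_on fact rest sks hin]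
  cases cscStepA (PySem.Str.stripChars (PySem.List.pyGetD (csc_parts fact) 2 "") ")")
        (PySem.List.pyGetD (csc_parts fact) 1 "") sks <;> rfl

theorem cscARes_cons_off (fact : String) (rest : List String) (sks : List (List String))
    (hin : PySem.Str.isIn "(on " fact = false) :
    cscARes (fact :: rest) sks = cscARes rest sks := by
  unfold cscARes
  rw [csc_sksLoop_cons_off fact rest sks hin]

theorem cscStepA_nn (b t : String) (sks : List (List String))
    (h : csc_findStacks sks b t = (-1, -1)) :
    cscStepA b t sks = some (sks ++ [[b, t]]) := by
  simp [cscStepA, h]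

theorem cscStepA_nf (b t : String) (sks : List (List String)) (j : Nat) (hj : j < sks.length)
    (h : csc_findStacks sks b t = (-1, (j : Int))) :
    cscStepA b t sks =
      if (PySem.List.pyGetD sks[j] 0 "" != t) = true then none
      else some (sks.set j (b :: sks[j])) := by
  have hj1 : (((j : Nat) : Int) == -1) = false := by
    rw [beq_eq_false_iff_ne]; omega
  have hget : PySem.List.pyGetD sks ((j : Nat) : Int) [] = sks[j] := by
    rw [PySem.List.pyGetD_natCast, List.getD_eq_getElem _ _ hj]
  simp only [cscStepA, h, hj1, Bool.and_false, Bool.false_eq_true, if_false, beq_self_eq_true,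
    Bool.and_true, if_true, hget, PySem.List.insert_zero, PySem.List.pySetD_natCast]

theorem cscStepA_fn (b t : String) (sks : List (List String)) (i : Nat) (hi : i < sks.length)
    (h : csc_findStacks sks b t = ((i : Int), -1)) :
    cscStepA b t sks =
      if (PySem.List.pyGetD sks[i] (-1) "" != b) = true then none
      else some (sks.set i (sks[i] ++ [t])) := by
  have hi1 : (((i : Nat) : Int) == -1) = false := by
    rw [beq_eq_false_iff_ne]; omega
  have hget : PySem.List.pyGetD sks ((i : Nat) : Int) [] = sks[i] := by
    rw [PySem.List.pyGetD_natCast, List.getD_eq_getElem _ _ hi]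
  simp only [cscStepA, h, hi1, Bool.false_and, Bool.false_eq_true, if_false, beq_self_eq_true,
    if_true, hget, PySem.List.pySetD_natCast]

theorem cscStepA_ff (b t : String) (sks : List (List String)) (i j : Nat)
    (hi : i < sks.length) (hj : j < sks.length)
    (h : csc_findStacks sks b t = ((i : Int), (j : Int))) :
    cscStepA b t sks =
      if i = j then none
      else if (PySem.List.pyGetD sks[i] (-1) "" != b) = true then none
      else if (PySem.List.pyGetD sks[j] 0 "" != t) = true then none
      else some ((sks.set i (sks[i] ++ sks[j])).eraseIdx j) := by
  have hi1 : (((i : Nat) : Int) == -1) = false := by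
    rw [beq_eq_false_iff_ne]; omega
  have hj1 : (((j : Nat) : Int) == -1) = false := by
    rw [beq_eq_false_iff_ne]; omega
  have hgi : PySem.List.pyGetD sks ((i : Nat) : Int) [] = sks[i] := by
    rw [PySem.List.pyGetD_natCast, List.getD_eq_getElem _ _ hi]
  have hgj : PySem.List.pyGetD sks ((j : Nat) : Int) [] = sks[j] := by
    rw [PySem.List.pyGetD_natCast, List.getD_eq_getElem _ _ hj]
  have htoNat : ((j : Nat) : Int).toNat = j := by omega
  by_cases hij : i = j
  · subst hij
    simp [cscStepA, h, hi1]
  · have hij' : (((i : Nat) : Int) == ((j : Nat) : Int)) = false := by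
      rw [beq_eq_false_iff_ne]; omega
    simp only [cscStepA, h, hi1, hj1, Bool.false_and, Bool.false_eq_true, if_false, hij',
      hgi, hgj, PySem.List.pySetD_natCast, htoNat, if_neg hij]

theorem csc_fold_cases0 (v : String) (sks : List (List String)) :
    (PySem.List.enumerate sks 0).foldl (fun a e => if e.2.contains v then e.1 else a) (-1) = -1 ∨
    ∃ k, ∃ _ : k < sks.length,
      (PySem.List.enumerate sks 0).foldl (fun a e => if e.2.contains v then e.1 else a) (-1)
        = (k : Int) ∧ v ∈ sks[k] := by
  rcases csc_fold_cases v sks 0 (-1) with h | ⟨k, hk, h, hm⟩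
  · left; exact h
  · right; exact ⟨k, hk, by rw [h]; ring, hm⟩

theorem csc_fold_found0 (v : String) (sks : List (List String)) (i : Nat)
    (hi : i < sks.length) (hv : v ∈ sks[i])
    (huniq : ∀ j (hj : j < sks.length), v ∈ sks[j] → j = i) :
    (PySem.List.enumerate sks 0).foldl (fun a e => if e.2.contains v then e.1 else a) (-1)
      = (i : Int) := by
  rw [csc_fold_found v sks i hi hv huniq 0 (-1)]; ring

theorem csc_notNodup_append (A B : List String) (h : ¬ A.Nodup ∨ ¬ B.Nodup) :
    ¬ (A ++ B).Nodup := by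
  intro hnd
  rw [List.nodup_append] at hnd
  tauto

theorem csc_hasDup_merge (sks : List (List String)) (i j : Nat) (hi : i < sks.length)
    (hj : j < sks.length) (hij : i ≠ j) (hd : cscHasDup sks) :
    cscHasDup ((sks.set i (sks[i] ++ sks[j])).eraseIdx j) := by
  obtain ⟨k, hk, hknd⟩ := hd
  have hL : ∀ m (hm : m < sks.length),
      (sks.set i (sks[i] ++ sks[j]))[m]'(by simpa using hm) =
      if i = m then sks[i] ++ sks[j] else sks[m] := by
    intro m hm
    rw [List.getElem_set]
  have hlen' : ((sks.set i (sks[i] ++ sks[j])).eraseIdx j).length = sks.length - 1 := by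
    rw [List.length_eraseIdx_of_lt (by simpa using hj)]
    simp
  by_cases hkj : k = j
  · have hjeq : sks[j] = sks[k] := by subst hkj; rfl
    by_cases hik : i < k
    · refine ⟨i, by rw [hlen']; omega, ?_⟩
      rw [List.getElem_eraseIdx, dif_pos (by omega), hL i (by omega), if_pos rfl]
      refine csc_notNodup_append _ _ (Or.inr ?_)
      rw [hjeq]; exact hknd
    · refine ⟨i - 1, by rw [hlen']; omega, ?_⟩
      rw [List.getElem_eraseIdx, dif_neg (by omega)]
      have hie : i - 1 + 1 = i := by omega
      simp only [hie]
      rw [hL i (by omega), if_pos rfl]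
      refine csc_notNodup_append _ _ (Or.inr ?_)
      rw [hjeq]; exact hknd
  · by_cases hkj' : k < j
    · refine ⟨k, by rw [hlen']; omega, ?_⟩
      rw [List.getElem_eraseIdx, dif_pos (by omega), hL k (by omega)]
      by_cases hik : i = k
      · rw [if_pos hik]
        refine csc_notNodup_append _ _ (Or.inl ?_)
        have hieq : sks[i] = sks[k] := by subst hik; rfl
        rw [hieq]; exact hknd
      · rw [if_neg hik]; exact hknd
    · refine ⟨k - 1, by rw [hlen']; omega, ?_⟩
      rw [List.getElem_eraseIdx, dif_neg (by omega)]
      have hke : k - 1 + 1 = k := by omega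
      simp only [hke]
      rw [hL k (by omega)]
      by_cases hik : i = k
      · rw [if_pos hik]
        refine csc_notNodup_append _ _ (Or.inl ?_)
        have hieq : sks[i] = sks[k] := by subst hik; rfl
        rw [hieq]; exact hknd
      · rw [if_neg hik]; exact hknd

theorem csc_exists_append_iff {α} (l : List α) (v : α) (P : α → Prop) :
    (∃ st ∈ l ++ [v], P st) ↔ (∃ st ∈ l, P st) ∨ P v := by
  simp [List.mem_append, or_and_right, exists_or]

theorem csc_exists_set_iff {α} (l : List α) (j : Nat) (hj : j < l.length) (v : α) (P : α → Prop) :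
    (∃ st ∈ l.set j v, P st) ↔ P v ∨ ∃ i, ∃ _ : i < l.length, i ≠ j ∧ P (l[i]) := by
  constructor
  · rintro ⟨st, hst, hP⟩
    obtain ⟨i, hi, heq⟩ := List.getElem_of_mem hst
    rw [List.getElem_set] at heq
    by_cases hji : j = i
    · left; rw [if_pos hji] at heq; rwa [← heq] at hP
    · right
      refine ⟨i, by simpa using hi, fun h => hji h.symm, ?_⟩
      rwa [← heq, if_neg hji] at hP
  · rintro (hP | ⟨i, hi, hne, hP⟩)
    · refine ⟨_, List.getElem_mem (n := j) (by simpa using hj), ?_⟩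
      rw [List.getElem_set, if_pos rfl]
      exact hP
    · refine ⟨_, List.getElem_mem (n := i) (by simpa using hi), ?_⟩
      rw [List.getElem_set, if_neg (fun h => hne h.symm)]
      exact hP

theorem csc_exists_merge_iff {α} (l : List α) (i j : Nat) (hi : i < l.length)
    (hj : j < l.length) (hij : i ≠ j) (v : α) (P : α → Prop) :
    (∃ st ∈ (l.set i v).eraseIdx j, P st) ↔
      P v ∨ ∃ k, ∃ _ : k < l.length, k ≠ i ∧ k ≠ j ∧ P (l[k]) := by
  have hL : ∀ m (hm : m < l.length), (l.set i v)[m]'(by simpa using hm) =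
      if i = m then v else l[m] := by
    intro m hm
    rw [List.getElem_set]
  have hlen' : ((l.set i v).eraseIdx j).length = l.length - 1 := by
    rw [List.length_eraseIdx_of_lt (by simpa using hj)]; simp
  constructor
  · rintro ⟨st, hst, hP⟩
    obtain ⟨m, hm, heq⟩ := List.getElem_of_mem hst
    rw [List.getElem_eraseIdx] at heq
    by_cases hmj : m < j
    · rw [dif_pos hmj, hL m (by omega)] at heq
      by_cases him : i = m
      · left; rw [if_pos him] at heq; rw [← heq] at hP; exact hP
      · right; exact ⟨m, by omega, fun h => him h.symm, by omega, by rw [if_neg him] at heq; rw [← heq] at hP; exact hP⟩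
    · rw [dif_neg hmj, hL (m+1) (by omega)] at heq
      by_cases him : i = m + 1
      · left; rw [if_pos him] at heq; rw [← heq] at hP; exact hP
      · right; exact ⟨m+1, by omega, fun h => him h.symm, by omega, by rw [if_neg him] at heq; rw [← heq] at hP; exact hP⟩
  · rintro (hP | ⟨k, hk, hki, hkj, hP⟩)
    · -- v sits at position (if i < j then i else i - 1)
      by_cases hij' : i < j
      · refine ⟨_, List.getElem_mem (n := i) (by omega), ?_⟩
        rw [List.getElem_eraseIdx, dif_pos hij', hL i (by omega), if_pos rfl]
        exact hP
      · refine ⟨_, List.getElem_mem (n := i - 1) (by rw [hlen']; omega), ?_⟩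
        rw [List.getElem_eraseIdx, dif_neg (by omega)]
        have hie : i - 1 + 1 = i := by omega
        simp only [hie]
        rw [hL i (by omega), if_pos rfl]
        exact hP
    · by_cases hkj' : k < j
      · refine ⟨_, List.getElem_mem (n := k) (by rw [hlen']; omega), ?_⟩
        rw [List.getElem_eraseIdx, dif_pos hkj', hL k (by omega), if_neg (fun h => hki h.symm)]
        exact hP
      · refine ⟨_, List.getElem_mem (n := k - 1) (by rw [hlen']; omega), ?_⟩
        rw [List.getElem_eraseIdx, dif_neg (by omega)]
        have hke : k - 1 + 1 = k := by omega
        simp only [hke]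
        rw [hL k (by omega), if_neg (fun h => hki h.symm)]
        exact hP

theorem csc_pairwise_set (sks : List (List String)) (j : Nat) (hj : j < sks.length)
    (v : List String)
    (hD : sks.Pairwise (fun s t => ∀ x, x ∈ s → x ∉ t))
    (hv : ∀ k (hk : k < sks.length), k ≠ j → ∀ x, x ∈ v → x ∉ sks[k]) :
    (sks.set j v).Pairwise (fun s t => ∀ x, x ∈ s → x ∉ t) := by
  rw [List.pairwise_iff_getElem] at hD ⊢
  intro p q hp hq hpq
  rw [List.getElem_set, List.getElem_set]
  have hp' : p < sks.length := by simpa using hp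
  have hq' : q < sks.length := by simpa using hq
  by_cases hjp : j = p
  · rw [if_pos hjp, if_neg (by omega)]
    exact hv q hq' (by omega)
  · rw [if_neg hjp]
    by_cases hjq : j = q
    · rw [if_pos hjq]
      intro x hx hxv
      exact hv p hp' (by omega) x hxv hx
    · rw [if_neg hjq]
      exact hD p q hp' hq' hpq

theorem csc_pairwise_merge (sks : List (List String)) (i j : Nat) (hi : i < sks.length)
    (hj : j < sks.length) (hij : i ≠ j) (v : List String)
    (hD : sks.Pairwise (fun s t => ∀ x, x ∈ s → x ∉ t))
    (hv : ∀ k (hk : k < sks.length), k ≠ i → k ≠ j → ∀ x, x ∈ v → x ∉ sks[k]) :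
    ((sks.set i v).eraseIdx j).Pairwise (fun s t => ∀ x, x ∈ s → x ∉ t) := by
  have hD' := List.pairwise_iff_getElem.mp hD
  have hL : ∀ m (hm : m < sks.length), (sks.set i v)[m]'(by simpa using hm) =
      if i = m then v else sks[m] := by
    intro m hm
    rw [List.getElem_set]
  rw [List.pairwise_iff_getElem]
  intro p q hp hq hpq
  have hlen' : ((sks.set i v).eraseIdx j).length = sks.length - 1 := by
    rw [List.length_eraseIdx_of_lt (by simpa using hj)]; simp
  rw [hlen'] at hp hq
  -- map positions back
  have key : ∀ m (hm : m < sks.length - 1),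
      ((sks.set i v).eraseIdx j)[m]'(by omega) =
        if i = (if m < j then m else m + 1) then v else sks[if m < j then m else m + 1]'(by split_ifs <;> omega) := by
    intro m hm
    rw [List.getElem_eraseIdx]
    by_cases hmj : m < j
    · rw [dif_pos hmj, hL m (by omega)]
      simp only [hmj, if_true]
    · rw [dif_neg hmj, hL (m+1) (by omega)]
      simp only [hmj, if_false]
  rw [key p hp, key q hq]
  have hpi : (if p < j then p else p + 1) < sks.length := by split_ifs <;> omega
  have hqi : (if q < j then q else q + 1) < sks.length := by split_ifs <;> omega
  have hne : (if p < j then p else p + 1) ≠ (if q < j then q else q + 1) := by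
    split_ifs <;> omega
  have hnej1 : (if p < j then p else p + 1) ≠ j := by split_ifs <;> omega
  have hnej2 : (if q < j then q else q + 1) ≠ j := by split_ifs <;> omega
  by_cases h1 : i = (if p < j then p else p + 1)
  · rw [if_pos h1, if_neg (by omega)]
    exact hv _ hqi (by omega) hnej2
  · rw [if_neg h1]
    by_cases h2 : i = (if q < j then q else q + 1)
    · rw [if_pos h2]
      intro x hx hxv
      exact hv _ hpi (by omega) hnej1 x hxv hx
    · rw [if_neg h2]
      intro x hx
      rcases Nat.lt_or_ge (if p < j then p else p + 1) (if q < j then q else q + 1) with hlt | hge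
      · exact hD' _ _ hpi hqi hlt x hx
      · intro hy
        exact hD' _ _ hqi hpi (by omega) x hy hx

-- B's relabel loop: value map over the items, first-match lookup commutes
theorem csc_get?_relabel (comp : PySem.Dict String Int) (c c' : Int) (x : String) :
    (PySem.Dict.mk (comp.items.map (fun p => if p.2 == c' then (p.1, c) else p))).get? x =
      (comp.get? x).map (fun v => if v = c' then c else v) := by
  obtain ⟨l⟩ := comp
  induction l with
  | nil => rfl
  | cons p rest ih =>
    obtain ⟨k, v⟩ := p
    simp only [List.map_cons]
    by_cases hpc : ((k, v).2 == c') = true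
    · rw [if_pos hpc]
      by_cases hx : (k == x) = true
      · rw [PySem.Dict.get?_mk_cons, PySem.Dict.get?_mk_cons, if_pos hx, if_pos hx,
          Option.map_some]
        simp only [beq_iff_eq] at hpc
        subst hpc
        simp
      · rw [PySem.Dict.get?_mk_cons, PySem.Dict.get?_mk_cons, if_neg hx, if_neg hx]
        exact ih
    · rw [if_neg hpc]
      by_cases hx : (k == x) = true
      · rw [PySem.Dict.get?_mk_cons, PySem.Dict.get?_mk_cons, if_pos hx, if_pos hx,
          Option.map_some]
        simp only [beq_iff_eq] at hpc
        simp [hpc]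
      · rw [PySem.Dict.get?_mk_cons, PySem.Dict.get?_mk_cons, if_neg hx, if_neg hx]
        exact ih

theorem csc_get?_none_of_not_mem (sks : List (List String)) (ha hb : PySem.Set String)
    (comp : PySem.Dict String Int) (fresh : Int) (h : cscInv sks ha hb comp fresh)
    (x : String) (hx : ∀ st ∈ sks, x ∉ st) : comp.get? x = none := by
  cases hcx : comp.get? x with
  | none => rfl
  | some c =>
    obtain ⟨st, hst, hmem⟩ := (h.2.2.2.2.1 x).mp (by rw [hcx]; rfl)
    exact absurd hmem (hx st hst)

theorem csc_inv_step_nn (sks : List (List String)) (ha hb : PySem.Set String)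
    (comp : PySem.Dict String Int) (fresh : Int) (h : cscInv sks ha hb comp fresh)
    (b t : String) (hbt : b ≠ t)
    (hbn : ∀ st ∈ sks, b ∉ st) (htn : ∀ st ∈ sks, t ∉ st) :
    cscInv (sks ++ [[b, t]]) (PySem.Set.add ha b) (PySem.Set.add hb t)
      ((comp.insert b fresh).insert t fresh) (fresh + 1) := by
  obtain ⟨h1, h2, h3, h4, h5, h6, h7⟩ := h
  have hcb : comp.get? b = none :=
    csc_get?_none_of_not_mem sks ha hb comp fresh ⟨h1, h2, h3, h4, h5, h6, h7⟩ b hbn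
  have hct : comp.get? t = none :=
    csc_get?_none_of_not_mem sks ha hb comp fresh ⟨h1, h2, h3, h4, h5, h6, h7⟩ t htn
  have hget : ∀ x, ((comp.insert b fresh).insert t fresh).get? x =
      if x = t then some fresh else if x = b then some fresh else comp.get? x := by
    intro x
    rw [PySem.Dict.get?_insert, PySem.Dict.get?_insert]
  -- an old key is neither b nor t
  have hold : ∀ x c, comp.get? x = some c → x ≠ b ∧ x ≠ t := by
    intro x c hx
    constructor <;> rintro rfl <;> simp [hcb, hct] at hx
  refine ⟨?_, ?_, ?_, ?_, ?_, ?_, ?_⟩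
  · intro st hst
    rcases List.mem_append.mp hst with hst | hst
    · exact h1 st hst
    · rw [List.mem_singleton] at hst
      subst hst
      exact ⟨by simp, by simp [hbt]⟩
  · rw [List.pairwise_append]
    refine ⟨h2, by simp, ?_⟩
    intro st hst v hv x hxst hxv
    rw [List.mem_singleton] at hv
    subst hv
    simp only [List.mem_cons, List.mem_singleton, List.not_mem_nil, or_false] at hxv
    rcases hxv with rfl | rfl
    · exact hbn st hst hxst
    · exact htn st hst hxst
  · intro x
    rw [PySem.Set.mem_add, csc_exists_append_iff sks [b, t] (fun st => x ∈ st.dropLast), h3]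
    simp [hbt]
  · intro x
    rw [PySem.Set.mem_add, csc_exists_append_iff sks [b, t] (fun st => x ∈ st.tail), h4]
    simp
  · intro x
    rw [hget, csc_exists_append_iff sks [b, t] (fun st => x ∈ st)]
    by_cases hxt : x = t
    · subst hxt; simp
    · rw [if_neg hxt]
      by_cases hxb : x = b
      · subst hxb; simp
      · rw [if_neg hxb, h5 x]
        simp [hxb, hxt]
  · intro x y cx cy hx hy
    rw [hget] at hx hy
    rw [csc_exists_append_iff sks [b, t] (fun st => x ∈ st ∧ y ∈ st)]
    have hcase : ∀ z cz, (if z = t then some fresh else if z = b then some fresh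
        else comp.get? z) = some cz →
        (z = t ∧ cz = fresh) ∨ (z = b ∧ cz = fresh) ∨
        (z ≠ t ∧ z ≠ b ∧ comp.get? z = some cz) := by
      intro z cz hz
      by_cases hzt : z = t
      · rw [if_pos hzt] at hz; exact Or.inl ⟨hzt, (Option.some.inj hz).symm⟩
      · rw [if_neg hzt] at hz
        by_cases hzb : z = b
        · rw [if_pos hzb] at hz; exact Or.inr (Or.inl ⟨hzb, (Option.some.inj hz).symm⟩)
        · rw [if_neg hzb] at hz; exact Or.inr (Or.inr ⟨hzt, hzb, hz⟩)
    rcases hcase x cx hx with ⟨rfl, rfl⟩ | ⟨rfl, rfl⟩ | ⟨hxt, hxb, hxo⟩ <;>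
      rcases hcase y cy hy with ⟨rfl, hyf⟩ | ⟨rfl, hyf⟩ | ⟨hyt, hyb, hyo⟩
    · exact iff_of_true (hyf.symm) (Or.inr ⟨by simp, by simp⟩)
    · exact iff_of_true (hyf.symm) (Or.inr ⟨by simp, by simp⟩)
    · refine iff_of_false (fun hcc => by have := h7 y cy hyo; omega) ?_
      rintro (⟨st, hst, hxs, hys⟩ | ⟨hxs, hys⟩)
      · exact htn st hst hxs
      · simp only [List.mem_cons, List.not_mem_nil, or_false] at hys
        rcases hys with rfl | rfl
        · exact hyb rfl
        · exact hyt rfl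
    · exact iff_of_true (hyf.symm) (Or.inr ⟨by simp, by simp⟩)
    · exact iff_of_true (hyf.symm) (Or.inr ⟨by simp, by simp⟩)
    · refine iff_of_false (fun hcc => by have := h7 y cy hyo; omega) ?_
      rintro (⟨st, hst, hxs, hys⟩ | ⟨hxs, hys⟩)
      · exact hbn st hst hxs
      · simp only [List.mem_cons, List.not_mem_nil, or_false] at hys
        rcases hys with rfl | rfl
        · exact hyb rfl
        · exact hyt rfl
    · refine iff_of_false (fun hcc => by have := h7 x cx hxo; omega) ?_
      rintro (⟨st, hst, hxs, hys⟩ | ⟨hxs, hys⟩)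
      · exact htn st hst hys
      · simp only [List.mem_cons, List.not_mem_nil, or_false] at hxs
        rcases hxs with rfl | rfl
        · exact hxb rfl
        · exact hxt rfl
    · refine iff_of_false (fun hcc => by have := h7 x cx hxo; omega) ?_
      rintro (⟨st, hst, hxs, hys⟩ | ⟨hxs, hys⟩)
      · exact hbn st hst hys
      · simp only [List.mem_cons, List.not_mem_nil, or_false] at hxs
        rcases hxs with rfl | rfl
        · exact hxb rfl
        · exact hxt rfl
    · rw [h6 x y cx cy hxo hyo]
      constructor
      · exact fun hs => Or.inl hs
      · rintro (hs | ⟨hxs, hys⟩)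
        · exact hs
        · simp only [List.mem_cons, List.not_mem_nil, or_false] at hxs
          rcases hxs with rfl | rfl
          · exact absurd rfl hxb
          · exact absurd rfl hxt
  · intro x c hx
    rw [hget] at hx
    by_cases hxt : x = t
    · rw [if_pos hxt] at hx
      have := Option.some.inj hx
      omega
    · rw [if_neg hxt] at hx
      by_cases hxb : x = b
      · rw [if_pos hxb] at hx
        have := Option.some.inj hx
        omega
      · rw [if_neg hxb] at hx
        have := h7 x c hx
        omega

theorem csc_exists_iff_getElem {α} (l : List α) (P : α → Prop) :
    (∃ st ∈ l, P st) ↔ ∃ i, ∃ _ : i < l.length, P l[i] := by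
  constructor
  · rintro ⟨st, hst, hP⟩
    obtain ⟨i, hi, rfl⟩ := List.getElem_of_mem hst
    exact ⟨i, hi, hP⟩
  · rintro ⟨i, hi, hP⟩
    exact ⟨l[i], List.getElem_mem hi, hP⟩

theorem csc_inv_step_nf (sks : List (List String)) (ha hb : PySem.Set String)
    (comp : PySem.Dict String Int) (fresh : Int) (h : cscInv sks ha hb comp fresh)
    (b t : String) (c : Int) (j : Nat) (hj : j < sks.length) (htj : t ∈ sks[j])
    (hbn : ∀ st ∈ sks, b ∉ st) (hct : comp.get? t = some c) (htnb : t ∉ hb) :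
    cscInv (sks.set j (b :: sks[j])) (PySem.Set.add ha b) (PySem.Set.add hb t)
      (comp.insert b c) fresh := by
  obtain ⟨h1, h2, h3, h4, h5, h6, h7⟩ := h
  have hne : sks[j] ≠ [] := (h1 _ (List.getElem_mem hj)).1
  have hnd : sks[j].Nodup := (h1 _ (List.getElem_mem hj)).2
  have hth : t ∉ sks[j].tail := fun hmem => htnb ((h4 t).mpr ⟨sks[j], List.getElem_mem hj, hmem⟩)
  have hhead : sks[j].head hne = t := by
    by_contra hc
    exact hth ((csc_mem_tail_iff _ hnd hne htj).mpr (fun heq => hc heq.symm))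
  have hcons : sks[j] = t :: sks[j].tail := by
    conv_lhs => rw [← List.cons_head_tail hne, hhead]
  have hbj : b ∉ sks[j] := hbn _ (List.getElem_mem hj)
  have hcb : comp.get? b = none :=
    csc_get?_none_of_not_mem sks ha hb comp fresh ⟨h1, h2, h3, h4, h5, h6, h7⟩ b hbn
  have hstj : ∀ i (hi : i < sks.length), t ∈ sks[i] → i = j :=
    fun i hi hm => csc_disj_idx h2 hi hj hm htj
  have hget : ∀ x, (comp.insert b c).get? x = if x = b then some c else comp.get? x := by
    intro x
    rw [PySem.Dict.get?_insert]
  have hbfresh : ∀ z cz, comp.get? z = some cz → z ≠ b := by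
    rintro z cz hz rfl
    rw [hcb] at hz
    exact absurd hz (by simp)
  refine ⟨?_, ?_, ?_, ?_, ?_, ?_, ?_⟩
  · intro st hst
    rcases List.mem_or_eq_of_mem_set hst with hst | rfl
    · exact h1 st hst
    · exact ⟨by simp, by rw [List.nodup_cons]; exact ⟨hbj, hnd⟩⟩
  · refine csc_pairwise_set sks j hj _ h2 ?_
    intro k hk hkj x hx
    rcases List.mem_cons.mp hx with rfl | hx
    · exact hbn _ (List.getElem_mem hk)
    · exact fun hxk => hkj (csc_disj_idx h2 hk hj hxk hx)
  · intro x
    rw [PySem.Set.mem_add, h3, csc_exists_set_iff sks j hj _ (fun st => x ∈ st.dropLast),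
      csc_exists_iff_getElem sks (fun st => x ∈ st.dropLast)]
    have hdn : (b :: sks[j]).dropLast = b :: sks[j].dropLast :=
      List.dropLast_cons_of_ne_nil hne
    rw [hdn]
    constructor
    · rintro (⟨i, hi, hP⟩ | rfl)
      · by_cases hij : i = j
        · subst hij
          exact Or.inl (List.mem_cons_of_mem _ hP)
        · exact Or.inr ⟨i, hi, hij, hP⟩
      · exact Or.inl List.mem_cons_self
    · rintro (hP | ⟨i, hi, hij, hP⟩)
      · rcases List.mem_cons.mp hP with rfl | hP
        · exact Or.inr rfl
        · exact Or.inl ⟨j, hj, hP⟩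
      · exact Or.inl ⟨i, hi, hP⟩
  · intro x
    rw [PySem.Set.mem_add, h4, csc_exists_set_iff sks j hj _ (fun st => x ∈ st.tail),
      csc_exists_iff_getElem sks (fun st => x ∈ st.tail)]
    constructor
    · rintro (⟨i, hi, hP⟩ | rfl)
      · by_cases hij : i = j
        · subst hij
          exact Or.inl (by rw [List.tail_cons, hcons]; exact List.mem_cons_of_mem _ hP)
        · exact Or.inr ⟨i, hi, hij, hP⟩
      · exact Or.inl (by rw [List.tail_cons, hcons]; exact List.mem_cons_self)
    · rintro (hP | ⟨i, hi, hij, hP⟩)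
      · rw [List.tail_cons, hcons] at hP
        rcases List.mem_cons.mp hP with rfl | hP
        · exact Or.inr rfl
        · exact Or.inl ⟨j, hj, hP⟩
      · exact Or.inl ⟨i, hi, hP⟩
  · intro x
    rw [hget, csc_exists_set_iff sks j hj _ (fun st => x ∈ st)]
    by_cases hxb : x = b
    · subst hxb
      simp only [if_pos rfl]
      exact iff_of_true rfl (Or.inl List.mem_cons_self)
    · rw [if_neg hxb, h5 x, csc_exists_iff_getElem sks (fun st => x ∈ st)]
      constructor
      · rintro ⟨i, hi, hP⟩
        by_cases hij : i = j
        · subst hij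
          exact Or.inl (List.mem_cons_of_mem _ hP)
        · exact Or.inr ⟨i, hi, hij, hP⟩
      · rintro (hP | ⟨i, hi, hij, hP⟩)
        · rcases List.mem_cons.mp hP with rfl | hP
          · exact absurd rfl hxb
          · exact ⟨j, hj, hP⟩
        · exact ⟨i, hi, hP⟩
  · intro x y cx cy hx hy
    rw [hget] at hx hy
    rw [csc_exists_set_iff sks j hj _ (fun st => x ∈ st ∧ y ∈ st)]
    have hmemj : ∀ z cz, comp.get? z = some cz → (cz = c ↔ z ∈ sks[j]) := by
      intro z cz hz
      rw [h6 z t cz c hz hct]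
      constructor
      · rintro ⟨st, hst, hzs, hts⟩
        obtain ⟨i, hi, rfl⟩ := List.getElem_of_mem hst
        have := hstj i hi hts
        subst this
        exact hzs
      · intro hzj
        exact ⟨sks[j], List.getElem_mem hj, hzj, htj⟩
    by_cases hxb : x = b
    · rw [if_pos hxb] at hx
      have hcx : cx = c := (Option.some.inj hx).symm
      subst hcx
      by_cases hyb : y = b
      · rw [if_pos hyb] at hy
        have : cy = cx := (Option.some.inj hy).symm
        subst this
        refine iff_of_true rfl (Or.inl ⟨?_, ?_⟩)
        · rw [hxb]; exact List.mem_cons_self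
        · rw [hyb]; exact List.mem_cons_self
      · rw [if_neg hyb] at hy
        constructor
        · intro hcc
          refine Or.inl ⟨by rw [hxb]; exact List.mem_cons_self,
            List.mem_cons_of_mem _ ((hmemj y cy hy).mp hcc.symm)⟩
        · rintro (⟨_, hy2⟩ | ⟨i, hi, hij, hbi, hyi⟩)
          · rcases List.mem_cons.mp hy2 with rfl | hy2
            · exact absurd rfl hyb
            · exact ((hmemj y cy hy).mpr hy2).symm
          · rw [hxb] at hbi
            exact absurd hbi (hbn _ (List.getElem_mem hi))
    · rw [if_neg hxb] at hx
      by_cases hyb : y = b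
      · rw [if_pos hyb] at hy
        have hcy : cy = c := (Option.some.inj hy).symm
        subst hcy
        constructor
        · intro hcc
          refine Or.inl ⟨List.mem_cons_of_mem _ ((hmemj x cx hx).mp hcc),
            by rw [hyb]; exact List.mem_cons_self⟩
        · rintro (⟨hx2, _⟩ | ⟨i, hi, hij, hxi, hbi⟩)
          · rcases List.mem_cons.mp hx2 with rfl | hx2
            · exact absurd rfl hxb
            · exact (hmemj x cx hx).mpr hx2
          · rw [hyb] at hbi
            exact absurd hbi (hbn _ (List.getElem_mem hi))
      · rw [if_neg hyb] at hy
        rw [h6 x y cx cy hx hy, csc_exists_iff_getElem sks (fun st => x ∈ st ∧ y ∈ st)]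
        constructor
        · rintro ⟨i, hi, hxi, hyi⟩
          by_cases hij : i = j
          · subst hij
            exact Or.inl ⟨List.mem_cons_of_mem _ hxi, List.mem_cons_of_mem _ hyi⟩
          · exact Or.inr ⟨i, hi, hij, hxi, hyi⟩
        · rintro (⟨hx2, hy2⟩ | ⟨i, hi, hij, hxi, hyi⟩)
          · rcases List.mem_cons.mp hx2 with rfl | hx2
            · exact absurd rfl hxb
            · rcases List.mem_cons.mp hy2 with rfl | hy2
              · exact absurd rfl hyb
              · exact ⟨j, hj, hx2, hy2⟩
          · exact ⟨i, hi, hxi, hyi⟩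
  · intro x cx hx
    rw [hget] at hx
    by_cases hxb : x = b
    · rw [if_pos hxb] at hx
      have : cx = c := (Option.some.inj hx).symm
      subst this
      exact h7 t cx hct
    · rw [if_neg hxb] at hx
      exact h7 x cx hx

theorem csc_inv_step_fn (sks : List (List String)) (ha hb : PySem.Set String)
    (comp : PySem.Dict String Int) (fresh : Int) (h : cscInv sks ha hb comp fresh)
    (b t : String) (c : Int) (i : Nat) (hi : i < sks.length) (hbi : b ∈ sks[i])
    (htn : ∀ st ∈ sks, t ∉ st) (hcb : comp.get? b = some c) (hbna : b ∉ ha) :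
    cscInv (sks.set i (sks[i] ++ [t])) (PySem.Set.add ha b) (PySem.Set.add hb t)
      (comp.insert t c) fresh := by
  obtain ⟨h1, h2, h3, h4, h5, h6, h7⟩ := h
  have hne : sks[i] ≠ [] := (h1 _ (List.getElem_mem hi)).1
  have hnd : sks[i].Nodup := (h1 _ (List.getElem_mem hi)).2
  have hbd : b ∉ sks[i].dropLast :=
    fun hmem => hbna ((h3 b).mpr ⟨sks[i], List.getElem_mem hi, hmem⟩)
  have hlast : sks[i].getLast hne = b := by
    by_contra hc
    exact hbd ((csc_mem_dropLast_iff _ hnd hne hbi).mpr (fun heq => hc heq.symm))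
  have hconcat : sks[i] = sks[i].dropLast ++ [b] := by
    conv_lhs => rw [← List.dropLast_concat_getLast hne, hlast]
  have hti : t ∉ sks[i] := htn _ (List.getElem_mem hi)
  have hct : comp.get? t = none :=
    csc_get?_none_of_not_mem sks ha hb comp fresh ⟨h1, h2, h3, h4, h5, h6, h7⟩ t htn
  have hsbi : ∀ k (hk : k < sks.length), b ∈ sks[k] → k = i :=
    fun k hk hm => csc_disj_idx h2 hk hi hm hbi
  have hmemx : ∀ x, x ∈ sks[i] ↔ x ∈ sks[i].dropLast ∨ x = b := by
    intro x
    conv_lhs => rw [hconcat]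
    simp
  refine ⟨?_, ?_, ?_, ?_, ?_, ?_, ?_⟩
  · intro st hst
    rcases List.mem_or_eq_of_mem_set hst with hst | rfl
    · exact h1 st hst
    · refine ⟨by simp, ?_⟩
      rw [List.nodup_append]
      exact ⟨hnd, List.nodup_singleton t, by
        intro a hax b' hb' heq
        rw [List.mem_singleton] at hb'
        subst hb'
        subst heq
        exact hti hax⟩
  · refine csc_pairwise_set sks i hi _ h2 ?_
    intro k hk hki x hx
    rcases List.mem_append.mp hx with hx | hx
    · exact fun hxk => hki (csc_disj_idx h2 hk hi hxk hx)
    · rw [List.mem_singleton] at hx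
      subst hx
      exact htn _ (List.getElem_mem hk)
  · intro x
    rw [PySem.Set.mem_add, h3, csc_exists_set_iff sks i hi _ (fun st => x ∈ st.dropLast),
      csc_exists_iff_getElem sks (fun st => x ∈ st.dropLast)]
    rw [List.dropLast_concat]
    constructor
    · rintro (⟨k, hk, hP⟩ | rfl)
      · by_cases hki : k = i
        · subst hki
          exact Or.inl ((hmemx x).mpr (Or.inl hP))
        · exact Or.inr ⟨k, hk, hki, hP⟩
      · exact Or.inl ((hmemx x).mpr (Or.inr rfl))
    · rintro (hP | ⟨k, hk, hki, hP⟩)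
      · rcases (hmemx x).mp hP with hP | rfl
        · exact Or.inl ⟨i, hi, hP⟩
        · exact Or.inr rfl
      · exact Or.inl ⟨k, hk, hP⟩
  · intro x
    rw [PySem.Set.mem_add, h4, csc_exists_set_iff sks i hi _ (fun st => x ∈ st.tail),
      csc_exists_iff_getElem sks (fun st => x ∈ st.tail)]
    rw [List.tail_append_of_ne_nil hne]
    constructor
    · rintro (⟨k, hk, hP⟩ | rfl)
      · by_cases hki : k = i
        · subst hki
          exact Or.inl (List.mem_append.mpr (Or.inl hP))
        · exact Or.inr ⟨k, hk, hki, hP⟩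
      · exact Or.inl (List.mem_append.mpr (Or.inr (List.mem_singleton_self _)))
    · rintro (hP | ⟨k, hk, hki, hP⟩)
      · rcases List.mem_append.mp hP with hP | hP
        · exact Or.inl ⟨i, hi, hP⟩
        · rw [List.mem_singleton] at hP
          exact Or.inr hP
      · exact Or.inl ⟨k, hk, hP⟩
  · intro x
    rw [PySem.Dict.get?_insert, csc_exists_set_iff sks i hi _ (fun st => x ∈ st)]
    by_cases hxt : x = t
    · rw [if_pos hxt]
      exact iff_of_true rfl (Or.inl (List.mem_append.mpr (Or.inr (by rw [hxt]; simp))))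
    · rw [if_neg hxt, h5 x, csc_exists_iff_getElem sks (fun st => x ∈ st)]
      constructor
      · rintro ⟨k, hk, hP⟩
        by_cases hki : k = i
        · subst hki
          exact Or.inl (List.mem_append.mpr (Or.inl hP))
        · exact Or.inr ⟨k, hk, hki, hP⟩
      · rintro (hP | ⟨k, hk, hki, hP⟩)
        · rcases List.mem_append.mp hP with hP | hP
          · exact ⟨i, hi, hP⟩
          · rw [List.mem_singleton] at hP
            exact absurd hP hxt
        · exact ⟨k, hk, hP⟩
  · intro x y cx cy hx hy
    rw [PySem.Dict.get?_insert] at hx hy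
    rw [csc_exists_set_iff sks i hi _ (fun st => x ∈ st ∧ y ∈ st)]
    have hmemi : ∀ z cz, comp.get? z = some cz → (cz = c ↔ z ∈ sks[i]) := by
      intro z cz hz
      rw [h6 z b cz c hz hcb]
      constructor
      · rintro ⟨st, hst, hzs, hbs⟩
        obtain ⟨k, hk, rfl⟩ := List.getElem_of_mem hst
        have := hsbi k hk hbs
        subst this
        exact hzs
      · intro hzj
        exact ⟨sks[i], List.getElem_mem hi, hzj, hbi⟩
    by_cases hxt : x = t
    · rw [if_pos hxt] at hx
      have hcx : cx = c := (Option.some.inj hx).symm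
      subst hcx
      by_cases hyt : y = t
      · rw [if_pos hyt] at hy
        have : cy = cx := (Option.some.inj hy).symm
        subst this
        refine iff_of_true rfl (Or.inl ⟨?_, ?_⟩)
        · rw [hxt]; exact List.mem_append.mpr (Or.inr (by simp))
        · rw [hyt]; exact List.mem_append.mpr (Or.inr (by simp))
      · rw [if_neg hyt] at hy
        constructor
        · intro hcc
          refine Or.inl ⟨by rw [hxt]; exact List.mem_append.mpr (Or.inr (by simp)),
            List.mem_append.mpr (Or.inl ((hmemi y cy hy).mp hcc.symm))⟩
        · rintro (⟨_, hy2⟩ | ⟨k, hk, hki, hti', hyi⟩)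
          · rcases List.mem_append.mp hy2 with hy2 | hy2
            · exact ((hmemi y cy hy).mpr hy2).symm
            · rw [List.mem_singleton] at hy2
              exact absurd hy2 hyt
          · rw [hxt] at hti'
            exact absurd hti' (htn _ (List.getElem_mem hk))
    · rw [if_neg hxt] at hx
      by_cases hyt : y = t
      · rw [if_pos hyt] at hy
        have hcy : cy = c := (Option.some.inj hy).symm
        subst hcy
        constructor
        · intro hcc
          refine Or.inl ⟨List.mem_append.mpr (Or.inl ((hmemi x cx hx).mp hcc)),
            by rw [hyt]; exact List.mem_append.mpr (Or.inr (by simp))⟩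
        · rintro (⟨hx2, _⟩ | ⟨k, hk, hki, hxi, hti'⟩)
          · rcases List.mem_append.mp hx2 with hx2 | hx2
            · exact (hmemi x cx hx).mpr hx2
            · rw [List.mem_singleton] at hx2
              exact absurd hx2 hxt
          · rw [hyt] at hti'
            exact absurd hti' (htn _ (List.getElem_mem hk))
      · rw [if_neg hyt] at hy
        rw [h6 x y cx cy hx hy, csc_exists_iff_getElem sks (fun st => x ∈ st ∧ y ∈ st)]
        constructor
        · rintro ⟨k, hk, hxk, hyk⟩
          by_cases hki : k = i
          · subst hki
            exact Or.inl ⟨List.mem_append.mpr (Or.inl hxk), List.mem_append.mpr (Or.inl hyk)⟩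
          · exact Or.inr ⟨k, hk, hki, hxk, hyk⟩
        · rintro (⟨hx2, hy2⟩ | ⟨k, hk, hki, hxk, hyk⟩)
          · rcases List.mem_append.mp hx2 with hx2 | hx2
            · rcases List.mem_append.mp hy2 with hy2 | hy2
              · exact ⟨i, hi, hx2, hy2⟩
              · rw [List.mem_singleton] at hy2
                exact absurd hy2 hyt
            · rw [List.mem_singleton] at hx2
              exact absurd hx2 hxt
          · exact ⟨k, hk, hxk, hyk⟩
  · intro x cx hx
    rw [PySem.Dict.get?_insert] at hx
    by_cases hxt : x = t
    · rw [if_pos hxt] at hx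
      have : cx = c := (Option.some.inj hx).symm
      subst this
      exact h7 b cx hcb
    · rw [if_neg hxt] at hx
      exact h7 x cx hx

theorem csc_inv_step_ff (sks : List (List String)) (ha hb : PySem.Set String)
    (comp : PySem.Dict String Int) (fresh : Int) (h : cscInv sks ha hb comp fresh)
    (b t : String) (cb ct : Int) (i j : Nat) (hi : i < sks.length) (hj : j < sks.length)
    (hij : i ≠ j) (hbi : b ∈ sks[i]) (htj : t ∈ sks[j])
    (hgb : comp.get? b = some cb) (hgt : comp.get? t = some ct)
    (hbna : b ∉ ha) (htnb : t ∉ hb) :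
    cscInv ((sks.set i (sks[i] ++ sks[j])).eraseIdx j) (PySem.Set.add ha b)
      (PySem.Set.add hb t)
      (PySem.Dict.mk (comp.items.map (fun p => if p.2 == ct then (p.1, cb) else p))) fresh := by
  obtain ⟨h1, h2, h3, h4, h5, h6, h7⟩ := h
  have hneA : sks[i] ≠ [] := (h1 _ (List.getElem_mem hi)).1
  have hndA : sks[i].Nodup := (h1 _ (List.getElem_mem hi)).2
  have hneB : sks[j] ≠ [] := (h1 _ (List.getElem_mem hj)).1
  have hndB : sks[j].Nodup := (h1 _ (List.getElem_mem hj)).2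
  have hdisjAB : ∀ x, x ∈ sks[i] → x ∉ sks[j] :=
    fun x hx hy => hij (csc_disj_idx h2 hi hj hx hy)
  have hbd : b ∉ sks[i].dropLast :=
    fun hmem => hbna ((h3 b).mpr ⟨sks[i], List.getElem_mem hi, hmem⟩)
  have hlast : sks[i].getLast hneA = b := by
    by_contra hc
    exact hbd ((csc_mem_dropLast_iff _ hndA hneA hbi).mpr (fun heq => hc heq.symm))
  have hconcatA : sks[i] = sks[i].dropLast ++ [b] := by
    conv_lhs => rw [← List.dropLast_concat_getLast hneA, hlast]
  have hth : t ∉ sks[j].tail := fun hmem => htnb ((h4 t).mpr ⟨sks[j], List.getElem_mem hj, hmem⟩)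
  have hhead : sks[j].head hneB = t := by
    by_contra hc
    exact hth ((csc_mem_tail_iff _ hndB hneB htj).mpr (fun heq => hc heq.symm))
  have hconsB : sks[j] = t :: sks[j].tail := by
    conv_lhs => rw [← List.cons_head_tail hneB, hhead]
  have hsbi : ∀ k (hk : k < sks.length), b ∈ sks[k] → k = i :=
    fun k hk hm => csc_disj_idx h2 hk hi hm hbi
  have hstj : ∀ k (hk : k < sks.length), t ∈ sks[k] → k = j :=
    fun k hk hm => csc_disj_idx h2 hk hj hm htj
  have hmemA : ∀ z cz, comp.get? z = some cz → (cz = cb ↔ z ∈ sks[i]) := by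
    intro z cz hz
    rw [h6 z b cz cb hz hgb]
    constructor
    · rintro ⟨st, hst, hzs, hbs⟩
      obtain ⟨k, hk, rfl⟩ := List.getElem_of_mem hst
      have := hsbi k hk hbs
      subst this
      exact hzs
    · intro hzj
      exact ⟨sks[i], List.getElem_mem hi, hzj, hbi⟩
  have hmemB : ∀ z cz, comp.get? z = some cz → (cz = ct ↔ z ∈ sks[j]) := by
    intro z cz hz
    rw [h6 z t cz ct hz hgt]
    constructor
    · rintro ⟨st, hst, hzs, hts⟩
      obtain ⟨k, hk, rfl⟩ := List.getElem_of_mem hst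
      have := hstj k hk hts
      subst this
      exact hzs
    · intro hzj
      exact ⟨sks[j], List.getElem_mem hj, hzj, htj⟩
  have hmemxA : ∀ x, x ∈ sks[i] ↔ x ∈ sks[i].dropLast ∨ x = b := by
    intro x
    conv_lhs => rw [hconcatA]
    simp
  have hmemxB : ∀ x, x ∈ sks[j] ↔ x = t ∨ x ∈ sks[j].tail := by
    intro x
    conv_lhs => rw [hconsB]
    simp
  have hget : ∀ x, (PySem.Dict.mk
      (comp.items.map (fun p => if p.2 == ct then (p.1, cb) else p))).get? x =
      (comp.get? x).map (fun v => if v = ct then cb else v) :=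
    fun x => csc_get?_relabel comp cb ct x
  refine ⟨?_, ?_, ?_, ?_, ?_, ?_, ?_⟩
  · intro st hst
    rcases List.mem_or_eq_of_mem_set (List.mem_of_mem_eraseIdx hst) with hst' | rfl
    · exact h1 st hst'
    · refine ⟨by simp [hneA], ?_⟩
      rw [List.nodup_append]
      exact ⟨hndA, hndB, fun a hax b' hb' heq => hdisjAB a hax (heq ▸ hb')⟩
  · refine csc_pairwise_merge sks i j hi hj hij _ h2 ?_
    intro k hk hki hkj x hx
    rcases List.mem_append.mp hx with hx | hx
    · exact fun hxk => hki (csc_disj_idx h2 hk hi hxk hx)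
    · exact fun hxk => hkj (csc_disj_idx h2 hk hj hxk hx)
  · intro x
    rw [PySem.Set.mem_add, h3,
      csc_exists_merge_iff sks i j hi hj hij _ (fun st => x ∈ st.dropLast),
      csc_exists_iff_getElem sks (fun st => x ∈ st.dropLast),
      List.dropLast_append_of_ne_nil hneB]
    constructor
    · rintro (⟨k, hk, hP⟩ | rfl)
      · by_cases hki : k = i
        · subst hki
          exact Or.inl (List.mem_append.mpr (Or.inl (List.mem_of_mem_dropLast hP)))
        · by_cases hkj : k = j
          · subst hkj
            exact Or.inl (List.mem_append.mpr (Or.inr hP))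
          · exact Or.inr ⟨k, hk, hki, hkj, hP⟩
      · exact Or.inl (List.mem_append.mpr (Or.inl hbi))
    · rintro (hP | ⟨k, hk, hki, hkj, hP⟩)
      · rcases List.mem_append.mp hP with hP | hP
        · rcases (hmemxA x).mp hP with hP | rfl
          · exact Or.inl ⟨i, hi, hP⟩
          · exact Or.inr rfl
        · exact Or.inl ⟨j, hj, hP⟩
      · exact Or.inl ⟨k, hk, hP⟩
  · intro x
    rw [PySem.Set.mem_add, h4,
      csc_exists_merge_iff sks i j hi hj hij _ (fun st => x ∈ st.tail),
      csc_exists_iff_getElem sks (fun st => x ∈ st.tail),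
      List.tail_append_of_ne_nil hneA]
    constructor
    · rintro (⟨k, hk, hP⟩ | rfl)
      · by_cases hki : k = i
        · subst hki
          exact Or.inl (List.mem_append.mpr (Or.inl hP))
        · by_cases hkj : k = j
          · subst hkj
            exact Or.inl (List.mem_append.mpr (Or.inr (List.mem_of_mem_tail hP)))
          · exact Or.inr ⟨k, hk, hki, hkj, hP⟩
      · exact Or.inl (List.mem_append.mpr (Or.inr htj))
    · rintro (hP | ⟨k, hk, hki, hkj, hP⟩)
      · rcases List.mem_append.mp hP with hP | hP
        · exact Or.inl ⟨i, hi, hP⟩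
        · rcases (hmemxB x).mp hP with rfl | hP
          · exact Or.inr rfl
          · exact Or.inl ⟨j, hj, hP⟩
      · exact Or.inl ⟨k, hk, hP⟩
  · intro x
    rw [hget, Option.isSome_map, h5 x,
      csc_exists_merge_iff sks i j hi hj hij _ (fun st => x ∈ st),
      csc_exists_iff_getElem sks (fun st => x ∈ st)]
    constructor
    · rintro ⟨k, hk, hP⟩
      by_cases hki : k = i
      · subst hki
        exact Or.inl (List.mem_append.mpr (Or.inl hP))
      · by_cases hkj : k = j
        · subst hkj
          exact Or.inl (List.mem_append.mpr (Or.inr hP))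
        · exact Or.inr ⟨k, hk, hki, hkj, hP⟩
    · rintro (hP | ⟨k, hk, hki, hkj, hP⟩)
      · rcases List.mem_append.mp hP with hP | hP
        · exact ⟨i, hi, hP⟩
        · exact ⟨j, hj, hP⟩
      · exact ⟨k, hk, hP⟩
  · intro x y cx cy hx hy
    have hcbct : cb ≠ ct :=
      fun he => hdisjAB b hbi ((hmemB b cb hgb).mp he)
    rw [hget] at hx hy
    rw [csc_exists_merge_iff sks i j hi hj hij _ (fun st => x ∈ st ∧ y ∈ st)]
    obtain ⟨cx0, hx0, hfx⟩ := Option.map_eq_some_iff.mp hx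
    obtain ⟨cy0, hy0, hfy⟩ := Option.map_eq_some_iff.mp hy
    subst hfx
    subst hfy
    have hfval : ∀ z cz, comp.get? z = some cz → (z ∈ sks[i] ∨ z ∈ sks[j]) →
        (if cz = ct then cb else cz) = cb := by
      intro z cz hz hmem
      rcases hmem with hm | hm
      · rw [if_neg (fun hzc => hdisjAB z hm ((hmemB z cz hz).mp hzc))]
        exact (hmemA z cz hz).mpr hm
      · rw [if_pos ((hmemB z cz hz).mpr hm)]
    have hfid : ∀ z cz, comp.get? z = some cz → ¬(z ∈ sks[i] ∨ z ∈ sks[j]) →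
        (if cz = ct then cb else cz) = cz ∧ cz ≠ cb := by
      intro z cz hz hmem
      rw [not_or] at hmem
      refine ⟨?_, fun hc => hmem.1 ((hmemA z cz hz).mp hc)⟩
      rw [if_neg (fun hc => hmem.2 ((hmemB z cz hz).mp hc))]
    by_cases hxAB : x ∈ sks[i] ∨ x ∈ sks[j]
    · by_cases hyAB : y ∈ sks[i] ∨ y ∈ sks[j]
      · refine iff_of_true ?_ (Or.inl ⟨List.mem_append.mpr hxAB, List.mem_append.mpr hyAB⟩)
        rw [hfval x cx0 hx0 hxAB, hfval y cy0 hy0 hyAB]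
      · obtain ⟨hfy', hyne⟩ := hfid y cy0 hy0 hyAB
        refine iff_of_false ?_ ?_
        · rw [hfval x cx0 hx0 hxAB, hfy']
          exact fun hc => hyne hc.symm
        · rintro (⟨_, hy2⟩ | ⟨k, hk, hki, hkj, hx2, hy2⟩)
          · exact hyAB (List.mem_append.mp hy2)
          · rcases hxAB with hm | hm
            · exact hki (csc_disj_idx h2 hk hi hx2 hm)
            · exact hkj (csc_disj_idx h2 hk hj hx2 hm)
    · by_cases hyAB : y ∈ sks[i] ∨ y ∈ sks[j]
      · obtain ⟨hfx', hxne⟩ := hfid x cx0 hx0 hxAB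
        refine iff_of_false ?_ ?_
        · rw [hfval y cy0 hy0 hyAB, hfx']
          exact hxne
        · rintro (⟨hx2, _⟩ | ⟨k, hk, hki, hkj, hx2, hy2⟩)
          · exact hxAB (List.mem_append.mp hx2)
          · rcases hyAB with hm | hm
            · exact hki (csc_disj_idx h2 hk hi hy2 hm)
            · exact hkj (csc_disj_idx h2 hk hj hy2 hm)
      · obtain ⟨hfx', _⟩ := hfid x cx0 hx0 hxAB
        obtain ⟨hfy', _⟩ := hfid y cy0 hy0 hyAB
        rw [hfx', hfy', h6 x y cx0 cy0 hx0 hy0,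
          csc_exists_iff_getElem sks (fun st => x ∈ st ∧ y ∈ st)]
        constructor
        · rintro ⟨k, hk, hxk, hyk⟩
          refine Or.inr ⟨k, hk, ?_, ?_, hxk, hyk⟩
          · rintro rfl
            exact hxAB (Or.inl hxk)
          · rintro rfl
            exact hxAB (Or.inr hxk)
        · rintro (⟨hx2, _⟩ | ⟨k, hk, hki, hkj, hx2, hy2⟩)
          · exact absurd (List.mem_append.mp hx2) hxAB
          · exact ⟨k, hk, hx2, hy2⟩
  · intro x cx hx
    rw [hget] at hx
    obtain ⟨cx0, hx0, hfx⟩ := Option.map_eq_some_iff.mp hx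
    subst hfx
    by_cases hc : cx0 = ct
    · rw [if_pos hc]
      exact h7 b cb hgb
    · rw [if_neg hc]
      exact h7 x cx0 hx0

theorem csc_doom (rest : List String) (sks : List (List String)) (h : cscHasDup sks) :
    cscARes rest sks = false := by
  induction rest generalizing sks with
  | nil =>
    obtain ⟨i, hi, hnd⟩ := h
    unfold cscARes
    simp only [csc_sksLoop]
    refine List.all_eq_false.mpr ⟨sks[i], List.getElem_mem hi, ?_⟩
    intro hp
    exact hnd ((csc_dup_iff _).mp hp)
  | cons fact rest ih =>
    by_cases hin : PySem.Str.isIn "(on " fact = true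
    · rw [cscARes_cons_on fact rest sks hin]
      rcases csc_fold_cases0 (PySem.Str.stripChars (PySem.List.pyGetD (csc_parts fact) 2 "") ")")
          sks with hfb | ⟨kb, hkb, hfb, hmb⟩ <;>
        rcases csc_fold_cases0 (PySem.List.pyGetD (csc_parts fact) 1 "") sks with
          hft | ⟨kt, hkt, hft, hmt⟩
      · rw [cscStepA_nn _ _ _ (by rw [csc_findStacks_eq, hfb, hft])]
        show cscARes rest (sks ++ _) = false
        obtain ⟨i, hi, hnd⟩ := h
        exact ih _ ⟨i, by simp; omega, by rw [List.getElem_append_left hi]; exact hnd⟩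
      · rw [cscStepA_nf _ _ _ kt hkt (by rw [csc_findStacks_eq, hfb, hft])]
        by_cases hc : (PySem.List.pyGetD sks[kt] 0 "" !=
            PySem.List.pyGetD (csc_parts fact) 1 "") = true
        · rw [if_pos hc]
        · rw [if_neg hc]
          show cscARes rest (sks.set kt _) = false
          obtain ⟨k, hk, hnd⟩ := h
          refine ih _ ⟨k, by simpa using hk, ?_⟩
          rw [List.getElem_set]
          by_cases hkk : kt = k
          · subst hkk
            rw [if_pos rfl]
            exact fun hcon => hnd (List.Nodup.of_cons hcon)
          · rw [if_neg hkk]; exact hnd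
      · rw [cscStepA_fn _ _ _ kb hkb (by rw [csc_findStacks_eq, hfb, hft])]
        by_cases hc : (PySem.List.pyGetD sks[kb] (-1) "" !=
            PySem.Str.stripChars (PySem.List.pyGetD (csc_parts fact) 2 "") ")") = true
        · rw [if_pos hc]
        · rw [if_neg hc]
          show cscARes rest (sks.set kb _) = false
          obtain ⟨k, hk, hnd⟩ := h
          refine ih _ ⟨k, by simpa using hk, ?_⟩
          rw [List.getElem_set]
          by_cases hkk : kb = k
          · subst hkk
            rw [if_pos rfl]
            exact fun hcon => csc_notNodup_append _ _ (Or.inl hnd) hcon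
          · rw [if_neg hkk]; exact hnd
      · rw [cscStepA_ff _ _ _ kb kt hkb hkt (by rw [csc_findStacks_eq, hfb, hft])]
        by_cases hbt : kb = kt
        · rw [if_pos hbt]
        · rw [if_neg hbt]
          by_cases hc1 : (PySem.List.pyGetD sks[kb] (-1) "" !=
              PySem.Str.stripChars (PySem.List.pyGetD (csc_parts fact) 2 "") ")") = true
          · rw [if_pos hc1]
          · rw [if_neg hc1]
            by_cases hc2 : (PySem.List.pyGetD sks[kt] 0 "" !=
                PySem.List.pyGetD (csc_parts fact) 1 "") = true
            · rw [if_pos hc2]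
            · rw [if_neg hc2]
              show cscARes rest ((sks.set kb _).eraseIdx kt) = false
              exact ih _ (csc_hasDup_merge sks kb kt hkb hkt hbt h)
    · rw [cscARes_cons_off fact rest sks (by simpa using hin)]
      exact ih sks h

theorem csc_main (rest : List String) (sks : List (List String))
    (ha hb : PySem.Set String) (comp : PySem.Dict String Int) (fresh : Int)
    (h : cscInv sks ha hb comp fresh) :
    cscARes rest sks = cscAlt_loop rest ha hb comp fresh := by
  induction rest generalizing sks ha hb comp fresh with
  | nil =>
    unfold cscARes
    simp only [csc_sksLoop, cscAlt_loop]
    exact List.all_eq_true.mpr (fun st hst => (csc_dup_iff st).mpr ((h.1 st hst).2))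
  | cons fact rest ih =>
    by_cases hin : PySem.Str.isIn "(on " fact = true
    case neg =>
      rw [cscARes_cons_off fact rest sks (by simpa using hin)]
      have hB : cscAlt_loop (fact :: rest) ha hb comp fresh =
          cscAlt_loop rest ha hb comp fresh := by
        simp only [cscAlt_loop, (by simpa using hin : PySem.Str.isIn "(on " fact = false),
          Bool.false_eq_true, if_false]
      rw [hB]
      exact ih sks ha hb comp fresh h
    case pos =>
      rw [cscARes_cons_on fact rest sks hin]
      simp only [cscAlt_loop, hin, if_true]
      rw [show cscAlt_parts fact = csc_parts fact from rfl]
      set t := PySem.List.pyGetD (csc_parts fact) 1 "" with htdef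
      set b := PySem.Str.stripChars (PySem.List.pyGetD (csc_parts fact) 2 "") ")" with hbdef
      obtain ⟨h1, h2, h3, h4, h5, h6, h7⟩ := h
      have hInv : cscInv sks ha hb comp fresh := ⟨h1, h2, h3, h4, h5, h6, h7⟩
      by_cases hcon : (PySem.Set.contains ha b || PySem.Set.contains hb t) = true
      · -- B returns False; A must reach an early False too
        rw [if_pos hcon]
        rcases Bool.or_eq_true_iff.mp hcon with hba | htb
        · -- b already has something above it: b is a non-last element of its stack
          obtain ⟨st, hst, hmem⟩ := (h3 b).mp ((PySem.Set.contains_iff _ _).mp hba)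
          obtain ⟨ib, hib, rfl⟩ := List.getElem_of_mem hst
          have hbmem : b ∈ sks[ib] := List.mem_of_mem_dropLast hmem
          have hne : sks[ib] ≠ [] := (h1 _ (List.getElem_mem hib)).1
          have hnd : sks[ib].Nodup := (h1 _ (List.getElem_mem hib)).2
          have hlast_ne : sks[ib].getLast hne ≠ b :=
            fun he => ((csc_mem_dropLast_iff _ hnd hne hbmem).mp hmem) he.symm
          have hchk : (PySem.List.pyGetD sks[ib] (-1) "" != b) = true := by
            rw [PySem.List.pyGetD_neg_one _ _ hne]
            exact bne_iff_ne.mpr hlast_ne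
          have hfb := csc_fold_found0 b sks ib hib hbmem
            (fun l hl hm => csc_disj_idx h2 hl hib hm hbmem)
          rcases csc_fold_cases0 t sks with hft | ⟨kt, hkt, hft, hmt⟩
          · rw [cscStepA_fn b t sks ib hib (by rw [csc_findStacks_eq, hfb, hft]), if_pos hchk]
          · by_cases hibkt : ib = kt
            · rw [cscStepA_ff b t sks ib kt hib hkt (by rw [csc_findStacks_eq, hfb, hft]),
                if_pos hibkt]
            · rw [cscStepA_ff b t sks ib kt hib hkt (by rw [csc_findStacks_eq, hfb, hft]),
                if_neg hibkt, if_pos hchk]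
        · -- t already rests on something: t is a non-head element of its stack
          obtain ⟨st, hst, hmem⟩ := (h4 t).mp ((PySem.Set.contains_iff _ _).mp htb)
          obtain ⟨jt, hjt, rfl⟩ := List.getElem_of_mem hst
          have htmem : t ∈ sks[jt] := List.mem_of_mem_tail hmem
          have hne : sks[jt] ≠ [] := (h1 _ (List.getElem_mem hjt)).1
          have hnd : sks[jt].Nodup := (h1 _ (List.getElem_mem hjt)).2
          have hhead_ne : sks[jt].head hne ≠ t :=
            fun he => ((csc_mem_tail_iff _ hnd hne htmem).mp hmem) he.symm
          have hchk : (PySem.List.pyGetD sks[jt] 0 "" != t) = true := by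
            conv_lhs => rw [← List.cons_head_tail hne]
            rw [PySem.List.pyGetD_zero_cons]
            exact bne_iff_ne.mpr hhead_ne
          have hft := csc_fold_found0 t sks jt hjt htmem
            (fun l hl hm => csc_disj_idx h2 hl hjt hm htmem)
          rcases csc_fold_cases0 b sks with hfb | ⟨kb, hkb, hfb, hmb⟩
          · rw [cscStepA_nf b t sks jt hjt (by rw [csc_findStacks_eq, hfb, hft]), if_pos hchk]
          · by_cases hkbjt : kb = jt
            · rw [cscStepA_ff b t sks kb jt hkb hjt (by rw [csc_findStacks_eq, hfb, hft]),
                if_pos hkbjt]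
            · rw [cscStepA_ff b t sks kb jt hkb hjt (by rw [csc_findStacks_eq, hfb, hft]),
                if_neg hkbjt]
              by_cases hcb' : (PySem.List.pyGetD sks[kb] (-1) "" != b) = true
              · rw [if_pos hcb']
              · rw [if_neg hcb', if_pos hchk]
      · rw [if_neg hcon]
        rw [Bool.not_eq_true, Bool.or_eq_false_iff] at hcon
        have hbna : b ∉ ha := fun hm =>
          ne_true_of_eq_false hcon.1 ((PySem.Set.contains_iff _ _).mpr hm)
        have htnb : t ∉ hb := fun hm =>
          ne_true_of_eq_false hcon.2 ((PySem.Set.contains_iff _ _).mpr hm)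
        by_cases hbt : (b == t) = true
        · -- a block on itself
          rw [if_pos hbt]
          have hbteq : b = t := eq_of_beq hbt
          by_cases hbm : ∃ st ∈ sks, b ∈ st
          · obtain ⟨st, hst, hbmem⟩ := hbm
            obtain ⟨i, hi, rfl⟩ := List.getElem_of_mem hst
            have hfb := csc_fold_found0 b sks i hi hbmem
              (fun l hl hm => csc_disj_idx h2 hl hi hm hbmem)
            have hft := csc_fold_found0 t sks i hi (hbteq ▸ hbmem)
              (fun l hl hm => csc_disj_idx h2 hl hi hm (hbteq ▸ hbmem))
            rw [cscStepA_ff b t sks i i hi hi (by rw [csc_findStacks_eq, hfb, hft]),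
              if_pos rfl]
          · have hbn : ∀ st ∈ sks, b ∉ st := fun st hst hm => hbm ⟨st, hst, hm⟩
            have hfb := csc_fold_none b sks 0 (-1) hbn
            have hft := csc_fold_none t sks 0 (-1) (hbteq ▸ hbn)
            rw [cscStepA_nn b t sks (by rw [csc_findStacks_eq, hfb, hft])]
            show cscARes rest (sks ++ [[b, t]]) = false
            refine csc_doom rest _ ⟨sks.length, by simp, ?_⟩
            have hlastE : (sks ++ [[b, t]])[sks.length]'(by simp) = [b, t] :=
              List.getElem_concat_length rfl _
            rw [hlastE]
            simp [hbteq]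
        · rw [if_neg hbt]
          have hbtne : b ≠ t := fun he => hbt (by rw [he]; simp)
          by_cases hcy : ((comp.get? b).isSome && (comp.get? b == comp.get? t)) = true
          · -- both ends already in the same chain
            rw [if_pos hcy]
            rw [Bool.and_eq_true] at hcy
            obtain ⟨hcbs, hcbt⟩ := hcy
            obtain ⟨c, hcb⟩ := Option.isSome_iff_exists.mp hcbs
            have hct : comp.get? t = some c := by
              rw [← (beq_iff_eq).mp hcbt, hcb]
            obtain ⟨st, hst, hbs, hts⟩ := (h6 b t c c hcb hct).mp rfl
            obtain ⟨i, hi, rfl⟩ := List.getElem_of_mem hst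
            have hfb := csc_fold_found0 b sks i hi hbs
              (fun l hl hm => csc_disj_idx h2 hl hi hm hbs)
            have hft := csc_fold_found0 t sks i hi hts
              (fun l hl hm => csc_disj_idx h2 hl hi hm hts)
            rw [cscStepA_ff b t sks i i hi hi (by rw [csc_findStacks_eq, hfb, hft]),
              if_pos rfl]
          · rw [if_neg hcy]
            cases hcb : comp.get? b with
            | none =>
              have hbn : ∀ st ∈ sks, b ∉ st := fun st hst hm => by
                have := (h5 b).mpr ⟨st, hst, hm⟩
                rw [hcb] at this
                simp at this
              have hfb := csc_fold_none b sks 0 (-1) hbn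
              cases hct : comp.get? t with
              | none =>
                have htn : ∀ st ∈ sks, t ∉ st := fun st hst hm => by
                  have := (h5 t).mpr ⟨st, hst, hm⟩
                  rw [hct] at this
                  simp at this
                have hft := csc_fold_none t sks 0 (-1) htn
                rw [cscStepA_nn b t sks (by rw [csc_findStacks_eq, hfb, hft])]
                show cscARes rest (sks ++ [[b, t]]) =
                  cscAlt_loop rest (PySem.Set.add ha b) (PySem.Set.add hb t)
                    ((comp.insert b fresh).insert t fresh) (fresh + 1)
                exact ih _ _ _ _ _
                  (csc_inv_step_nn sks ha hb comp fresh hInv b t hbtne hbn htn)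
              | some c =>
                obtain ⟨st, hst, htmem⟩ := (h5 t).mp (by rw [hct]; rfl)
                obtain ⟨j, hj, rfl⟩ := List.getElem_of_mem hst
                have hft := csc_fold_found0 t sks j hj htmem
                  (fun l hl hm => csc_disj_idx h2 hl hj hm htmem)
                have hne : sks[j] ≠ [] := (h1 _ (List.getElem_mem hj)).1
                have hnd : sks[j].Nodup := (h1 _ (List.getElem_mem hj)).2
                have hth : t ∉ sks[j].tail :=
                  fun hmem => htnb ((h4 t).mpr ⟨sks[j], List.getElem_mem hj, hmem⟩)
                have hhead : sks[j].head hne = t := by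
                  by_contra hc
                  exact hth ((csc_mem_tail_iff _ hnd hne htmem).mpr (fun heq => hc heq.symm))
                have hchk : (PySem.List.pyGetD sks[j] 0 "" != t) = false := by
                  conv_lhs => rw [← List.cons_head_tail hne]
                  rw [PySem.List.pyGetD_zero_cons, hhead]
                  simp
                rw [cscStepA_nf b t sks j hj (by rw [csc_findStacks_eq, hfb, hft]),
                  if_neg (by rw [hchk]; simp)]
                show cscARes rest (sks.set j (b :: sks[j])) =
                  cscAlt_loop rest (PySem.Set.add ha b) (PySem.Set.add hb t)
                    (comp.insert b c) fresh
                exact ih _ _ _ _ _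
                  (csc_inv_step_nf sks ha hb comp fresh hInv b t c j hj htmem hbn hct htnb)
            | some c =>
              obtain ⟨st, hst, hbmem⟩ := (h5 b).mp (by rw [hcb]; rfl)
              obtain ⟨i, hi, rfl⟩ := List.getElem_of_mem hst
              have hfb := csc_fold_found0 b sks i hi hbmem
                (fun l hl hm => csc_disj_idx h2 hl hi hm hbmem)
              have hneA : sks[i] ≠ [] := (h1 _ (List.getElem_mem hi)).1
              have hndA : sks[i].Nodup := (h1 _ (List.getElem_mem hi)).2
              have hbd : b ∉ sks[i].dropLast :=
                fun hmem => hbna ((h3 b).mpr ⟨sks[i], List.getElem_mem hi, hmem⟩)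
              have hlastb : sks[i].getLast hneA = b := by
                by_contra hc
                exact hbd ((csc_mem_dropLast_iff _ hndA hneA hbmem).mpr
                  (fun heq => hc heq.symm))
              have hchkb : (PySem.List.pyGetD sks[i] (-1) "" != b) = false := by
                rw [PySem.List.pyGetD_neg_one _ _ hneA, hlastb]
                simp
              cases hct : comp.get? t with
              | none =>
                have htn : ∀ st ∈ sks, t ∉ st := fun st hst hm => by
                  have := (h5 t).mpr ⟨st, hst, hm⟩
                  rw [hct] at this
                  simp at this
                have hft := csc_fold_none t sks 0 (-1) htn
                rw [cscStepA_fn b t sks i hi (by rw [csc_findStacks_eq, hfb, hft]),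
                  if_neg (by rw [hchkb]; simp)]
                show cscARes rest (sks.set i (sks[i] ++ [t])) =
                  cscAlt_loop rest (PySem.Set.add ha b) (PySem.Set.add hb t)
                    (comp.insert t c) fresh
                exact ih _ _ _ _ _
                  (csc_inv_step_fn sks ha hb comp fresh hInv b t c i hi hbmem htn hcb hbna)
              | some c' =>
                obtain ⟨st, hst, htmem⟩ := (h5 t).mp (by rw [hct]; rfl)
                obtain ⟨j, hj, rfl⟩ := List.getElem_of_mem hst
                have hft := csc_fold_found0 t sks j hj htmem
                  (fun l hl hm => csc_disj_idx h2 hl hj hm htmem)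
                have hij : i ≠ j := by
                  rintro rfl
                  exact hcy (by rw [hcb, hct, (h6 b t c c' hcb hct).mpr
                    ⟨sks[i], List.getElem_mem hi, hbmem, htmem⟩]; simp)
                have hneB : sks[j] ≠ [] := (h1 _ (List.getElem_mem hj)).1
                have hndB : sks[j].Nodup := (h1 _ (List.getElem_mem hj)).2
                have hth : t ∉ sks[j].tail :=
                  fun hmem => htnb ((h4 t).mpr ⟨sks[j], List.getElem_mem hj, hmem⟩)
                have hhead : sks[j].head hneB = t := by
                  by_contra hc
                  exact hth ((csc_mem_tail_iff _ hndB hneB htmem).mpr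
                    (fun heq => hc heq.symm))
                have hchkt : (PySem.List.pyGetD sks[j] 0 "" != t) = false := by
                  conv_lhs => rw [← List.cons_head_tail hneB]
                  rw [PySem.List.pyGetD_zero_cons, hhead]
                  simp
                rw [cscStepA_ff b t sks i j hi hj (by rw [csc_findStacks_eq, hfb, hft]),
                  if_neg hij, if_neg (by rw [hchkb]; simp), if_neg (by rw [hchkt]; simp)]
                show cscARes rest ((sks.set i (sks[i] ++ sks[j])).eraseIdx j) =
                  cscAlt_loop rest (PySem.Set.add ha b) (PySem.Set.add hb t)
                    (PySem.Dict.mk (comp.items.map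
                      (fun p => if p.2 == c' then (p.1, c) else p))) fresh
                exact ih _ _ _ _ _
                  (csc_inv_step_ff sks ha hb comp fresh hInv b t c c' i j hi hj hij
                    hbmem htmem hcb hct hbna htnb)

theorem csc_inv_empty : cscInv [] PySem.Set.empty PySem.Set.empty PySem.Dict.empty 0 := by
  refine ⟨?_, ?_, ?_, ?_, ?_, ?_, ?_⟩ <;>
    simp [PySem.Dict.get?_empty, PySem.Set.empty]

-- ===== VERDICT (by name: the statement is the Claim_ definition above) =====
theorem check_self_consistency_spec : Claim_equal_check_self_consistency := by
  intro domain facts pairs _ _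
  show check_self_consistency domain facts pairs = check_self_consistency_alt domain facts pairs
  show (if (facts.any fun f1 => facts.any fun f2 => pairs.contains (f1, f2)) then false
        else if domain == "blocks" then
          match csc_sksLoop facts [] with
          | none => false
          | some s => if csc_dupCheck s then csc_holdingLoop facts 0 else false
        else true) =
       (if (pairs.any fun p => PySem.Set.contains (PySem.Set.ofList facts) p.1 &&
              PySem.Set.contains (PySem.Set.ofList facts) p.2) then false
        else if domain == "blocks" then
          if cscAlt_loop facts PySem.Set.empty PySem.Set.empty PySem.Dict.empty 0 then
            if 1 < facts.countP (fun f => PySem.Str.isIn "(holding" f) then false else true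
          else false
        else true)
  rw [csc_contra_eq]
  cases hcb : (pairs.any fun p => PySem.Set.contains (PySem.Set.ofList facts) p.1 &&
      PySem.Set.contains (PySem.Set.ofList facts) p.2) with
  | true => rfl
  | false =>
    simp only [Bool.false_eq_true, if_false]
    cases hdb : (domain == "blocks") with
    | false => rfl
    | true =>
      simp only [if_true]
      have hmain := csc_main facts [] PySem.Set.empty PySem.Set.empty PySem.Dict.empty 0 csc_inv_empty
      unfold cscARes at hmain
      cases hsl : csc_sksLoop facts [] with
      | none => rw [hsl] at hmain; rw [← hmain]; rfl
      | some s =>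
        rw [hsl] at hmain
        rw [← hmain]
        show (if csc_dupCheck s = true then csc_holdingLoop facts 0 else false) =
          if csc_dupCheck s = true then
            (if 1 < facts.countP (fun f => PySem.Str.isIn "(holding" f) then false else true)
          else false
        by_cases hdup : csc_dupCheck s = true
        · simp only [hdup, if_true]
          rw [csc_holding_eq facts 0 (by norm_num)]
          by_cases h1 : 1 < facts.countP (fun f => PySem.Str.isIn "(holding" f)
          · rw [if_pos h1, decide_eq_false_iff_not]; omega
          · rw [if_neg h1, decide_eq_true_iff]; omega
        · rw [if_neg hdup, if_neg hdup]
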